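-- pv_equiv track=rewrite | github.com/KDmewcon/auto_capture_pikachu_python | tests/test_solver.py | _reference_can_connect
-- ===== SOURCE A (Python) =====
-- from collections import deque
-- from typing import List, Optional, Sequence, Tuple
--
-- Coord = Tuple[int, int]
--
-- def _reference_can_connect(board: Sequence[Sequence[int]], start: Coord, end: Coord) -> bool:
--     if start == end:
--         return False
--
--     rows = len(board)
--     cols = len(board[0])
--
--     sr, sc = start
--     er, ec = end
--     if board[sr][sc] == 0 or board[sr][sc] != board[er][ec]:
--         return False
--
--     padded_rows = rows + 2
--     padded_cols = cols + 2
--     padded = [[0] * padded_cols for _ in range(padded_rows)]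
--     for row in range(rows):
--         for col in range(cols):
--             padded[row + 1][col + 1] = board[row][col]
--
--     start_padded = (sr + 1, sc + 1)
--     end_padded = (er + 1, ec + 1)
--     directions: List[Coord] = [(1, 0), (-1, 0), (0, 1), (0, -1)]
--
--     queue: deque[Tuple[int, int, int, int]] = deque()
--     best_turns: dict[Tuple[int, int, int], int] = {}
--
--     for direction_index, (delta_row, delta_col) in enumerate(directions):
--         next_row = start_padded[0] + delta_row
--         next_col = start_padded[1] + delta_col
--         if not (0 <= next_row < padded_rows and 0 <= next_col < padded_cols):
--             continue
--         if (next_row, next_col) != end_padded and padded[next_row][next_col] != 0: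
--             continue
--
--         queue.append((next_row, next_col, direction_index, 0))
--         best_turns[(next_row, next_col, direction_index)] = 0
--
--     while queue:
--         row, col, direction_index, turns = queue.popleft()
--         if (row, col) == end_padded:
--             return True
--
--         for next_direction_index, (delta_row, delta_col) in enumerate(directions):
--             next_turns = turns + (0 if next_direction_index == direction_index else 1)
--             if next_turns > 2:
--                 continue
--
--             next_row = row + delta_row
--             next_col = col + delta_col
--             if not (0 <= next_row < padded_rows and 0 <= next_col < padded_cols):
--                 continue
--             if (next_row, next_col) != end_padded and padded[next_row][next_col] != 0:
--                 continue
--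
--             state = (next_row, next_col, next_direction_index)
--             previous_turns = best_turns.get(state)
--             if previous_turns is not None and previous_turns <= next_turns:
--                 continue
--
--             best_turns[state] = next_turns
--             queue.append((next_row, next_col, next_direction_index, next_turns))
--
--     return False
-- ===== SOURCE B (Python) =====
-- def _reference_can_connect(board, start, end):
--     if start == end:
--         return False
--
--     rows = len(board)
--     cols = len(board[0])
--
--     sr, sc = start
--     er, ec = end
--     if board[sr][sc] == 0 or board[sr][sc] != board[er][ec]:
--         return False
--
--     end_padded = (er + 1, ec + 1)
--
--     def passable(r, c):
--         if not (0 <= r < rows + 2 and 0 <= c < cols + 2):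
--             return False
--         if (r, c) == end_padded:
--             return True
--         if 1 <= r <= rows and 1 <= c <= cols:
--             return board[r - 1][c - 1] == 0
--         return True  # padding ring is empty
--
--     def ray(r, c, dr, dc):
--         out = []
--         r += dr
--         c += dc
--         while passable(r, c):
--             out.append((r, c))
--             r += dr
--             c += dc
--         return out
--
--     directions = [(1, 0), (-1, 0), (0, 1), (0, -1)]
--     cells = {(sr + 1, sc + 1)}
--     for _ in range(3):
--         new = set(cells)
--         for (r, c) in cells:
--             for dr, dc in directions:
--                 new.update(ray(r, c, dr, dc))
--         cells = new
--     return end_padded in cells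
-- ===== Notes on version B (the rewrite author's own statement) =====
-- stated objective: alternative
-- what changed: Replaces A's turn-counting BFS (deque + best-turns dict over (row,col,direction) states on an explicitly built padded grid) with the classic line-scan solver: three synchronous straight-ray expansion levels over cell sets, testing passability directly on the board with the 1-padding handled arithmetically.
import Mathlib
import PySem

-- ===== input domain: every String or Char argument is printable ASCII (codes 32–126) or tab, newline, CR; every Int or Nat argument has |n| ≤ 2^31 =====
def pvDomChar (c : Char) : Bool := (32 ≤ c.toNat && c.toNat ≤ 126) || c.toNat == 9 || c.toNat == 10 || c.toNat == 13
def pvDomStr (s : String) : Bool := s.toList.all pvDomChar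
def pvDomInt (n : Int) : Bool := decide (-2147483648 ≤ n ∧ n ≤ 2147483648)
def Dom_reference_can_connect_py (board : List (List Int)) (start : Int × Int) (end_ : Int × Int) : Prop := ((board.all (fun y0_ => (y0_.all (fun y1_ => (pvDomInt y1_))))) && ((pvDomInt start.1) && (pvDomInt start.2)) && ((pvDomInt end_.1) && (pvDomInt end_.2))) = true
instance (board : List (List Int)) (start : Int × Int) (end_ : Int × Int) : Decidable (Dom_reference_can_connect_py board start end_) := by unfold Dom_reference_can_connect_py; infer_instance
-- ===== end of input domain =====

-- B replaces A's turn-counting BFS (deque + best-turns dict over (row,col,direction) states) by three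
-- synchronous straight-line ray-expansion levels over cell sets on the same implicitly 1-padded board
-- (objective: alternative algorithm of similar cost; return value proved equal on all of Pre_).

-- board[r][c] as an Option (none exactly where Python raises IndexError)
def pvLookA (board : List (List Int)) (r c : Int) : Option Int :=
  (PySem.List.pyGet? board r).bind fun row => PySem.List.pyGet? row c

def pvLookB (board : List (List Int)) (r c : Int) : Option Int :=
  (PySem.List.pyGet? board r).bind fun row => PySem.List.pyGet? row c

def pvPreLook (board : List (List Int)) (r c : Int) : Option Int :=
  (PySem.List.pyGet? board r).bind fun row => PySem.List.pyGet? row c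

-- ===== PORT A =====  (transliteration of the BFS of _reference_can_connect)
def pvDirsA : List (Int × Int) := [(1,0),(-1,0),(0,1),(0,-1)]

-- padded = [[0]*(cols+2) for _ in range(rows+2)]; then the double assignment loop
def pvPadded (board : List (List Int)) (rows cols : Nat) : List (List Int) :=
  (List.range rows).foldl (fun p row =>
      (List.range cols).foldl (fun p col =>
          p.set (row+1) ((p.getD (row+1) []).set (col+1) ((board.getD row []).getD col 0))) p)
    (List.replicate (rows+2) (List.replicate (cols+2) 0))

-- the two inline 'continue' tests of A: in-bounds, and (cell == end_padded or padded cell == 0)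
def pvChkA (padded : List (List Int)) (prows pcols : Int) (ep : Int × Int) (nr nc : Int) : Bool :=
  (decide (0 ≤ nr) && decide (nr < prows) && decide (0 ≤ nc) && decide (nc < pcols)) &&
  (decide ((nr, nc) = ep) || ((padded.getD nr.toNat []).getD nc.toNat 0 == 0))

-- body of 'for next_direction_index, (dr, dc) in enumerate(directions)'
def pvBFSstep (padded : List (List Int)) (prows pcols : Int) (ep : Int × Int)
    (r c d t : Int)
    (qb : List (Int × Int × Int × Int) × PySem.Dict (Int × Int × Int) Int)
    (p : Int × Int × Int) :
    List (Int × Int × Int × Int) × PySem.Dict (Int × Int × Int) Int :=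
  let nt : Int := t + (if p.1 = d then 0 else 1)
  if nt > 2 then qb
  else
    let nr := r + p.2.1
    let nc := c + p.2.2
    if pvChkA padded prows pcols ep nr nc then
      match qb.2.get? (nr, nc, p.1) with
      | some pt =>
          if pt ≤ nt then qb
          else (qb.1 ++ [(nr, nc, p.1, nt)], qb.2.insert (nr, nc, p.1) nt)
      | none => (qb.1 ++ [(nr, nc, p.1, nt)], qb.2.insert (nr, nc, p.1) nt)
    else qb

-- 'while queue:' with fuel (the fuel is shown sufficient in the proofs below)
def pvBFSloop (padded : List (List Int)) (prows pcols : Int) (ep : Int × Int) :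
    Nat → List (Int × Int × Int × Int) → PySem.Dict (Int × Int × Int) Int → Bool
  | 0, _, _ => false
  | _ + 1, [], _ => false
  | fuel + 1, e :: q, b =>
      if (e.1, e.2.1) = ep then true
      else
        let qb := (PySem.List.enumerate pvDirsA).foldl
          (pvBFSstep padded prows pcols ep e.1 e.2.1 e.2.2.1 e.2.2.2) (q, b)
        pvBFSloop padded prows pcols ep fuel qb.1 qb.2

-- the initial seeding loop over enumerate(directions)
def pvBFSinit (padded : List (List Int)) (prows pcols : Int) (ep sp : Int × Int) :
    List (Int × Int × Int × Int) × PySem.Dict (Int × Int × Int) Int :=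
  (PySem.List.enumerate pvDirsA).foldl
    (fun qb p =>
      let nr := sp.1 + p.2.1
      let nc := sp.2 + p.2.2
      if pvChkA padded prows pcols ep nr nc then
        (qb.1 ++ [(nr, nc, p.1, 0)], qb.2.insert (nr, nc, p.1) 0)
      else qb)
    ([], PySem.Dict.empty)

def reference_can_connect_py (board : List (List Int)) (start : Int × Int) (end_ : Int × Int) : Bool :=
  if start = end_ then false
  else
    let rows := board.length
    let cols := (board.headD []).length
    match pvLookA board start.1 start.2, pvLookA board end_.1 end_.2 with
    | some sv, some ev =>
        if sv == 0 || sv != ev then false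
        else
          let padded := pvPadded board rows cols
          let sp : Int × Int := (start.1 + 1, start.2 + 1)
          let ep : Int × Int := (end_.1 + 1, end_.2 + 1)
          let qb := pvBFSinit padded ((rows : Int) + 2) ((cols : Int) + 2) ep sp
          pvBFSloop padded ((rows : Int) + 2) ((cols : Int) + 2) ep
            (60 * ((rows + 2) * (cols + 2)) + 8) qb.1 qb.2
    | _, _ => false

-- ===== PORT B =====  (transliteration of Source B: three ray-expansion levels)
def pvDirsB : List (Int × Int) := [(1,0),(-1,0),(0,1),(0,-1)]

def pvPassB (board : List (List Int)) (rows cols : Int) (ep : Int × Int) (r c : Int) : Bool :=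
  if ¬ (0 ≤ r ∧ r < rows + 2 ∧ 0 ≤ c ∧ c < cols + 2) then false
  else if (r, c) = ep then true
  else if 1 ≤ r ∧ r ≤ rows ∧ 1 ≤ c ∧ c ≤ cols then
    (board.getD (r - 1).toNat []).getD (c - 1).toNat 0 == 0
  else true

def pvRayB (board : List (List Int)) (rows cols : Int) (ep : Int × Int) :
    Nat → Int → Int → Int → Int → List (Int × Int)
  | 0, _, _, _, _ => []
  | fuel + 1, r, c, dr, dc =>
      if pvPassB board rows cols ep (r + dr) (c + dc) then
        (r + dr, c + dc) :: pvRayB board rows cols ep fuel (r + dr) (c + dc) dr dc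
      else []

def pvRayFuel (rows cols : Int) : Nat := (rows + cols + 8).toNat

def pvExpandB (board : List (List Int)) (rows cols : Int) (ep : Int × Int)
    (cells : PySem.Set (Int × Int)) : PySem.Set (Int × Int) :=
  cells.foldl (fun acc rc =>
      pvDirsB.foldl (fun acc dd =>
          PySem.Set.update acc (pvRayB board rows cols ep (pvRayFuel rows cols) rc.1 rc.2 dd.1 dd.2))
        acc)
    cells

def reference_can_connect_py_alt (board : List (List Int)) (start : Int × Int) (end_ : Int × Int) : Bool :=
  if start = end_ then false
  else
    let rows : Int := (board.length : Int)
    let cols : Int := ((board.headD []).length : Int)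
    match pvLookB board start.1 start.2 with
    | none => false
    | some sv =>
      match pvLookB board end_.1 end_.2 with
      | none => false
      | some ev =>
        if sv == 0 || sv != ev then false
        else
          let ep : Int × Int := (end_.1 + 1, end_.2 + 1)
          let cells := (List.range 3).foldl
            (fun cells _ => pvExpandB board rows cols ep cells)
            (PySem.Set.ofList [(start.1 + 1, start.2 + 1)])
          PySem.Set.contains cells ep

-- ===== PRECONDITION & SPEC =====
-- Pre_ excludes exactly the inputs where the Python A raises: empty board / out-of-range start or end
-- index (IndexError), or — only when the colour guard passes — a row shorter than len(board[0])
-- (IndexError in the padding loop).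
def Pre_reference_can_connect_py (board : List (List Int)) (start : Int × Int) (end_ : Int × Int) : Prop :=
  start = end_ ∨
    (board ≠ [] ∧
      (pvPreLook board start.1 start.2).isSome ∧ (pvPreLook board end_.1 end_.2).isSome ∧
      ((pvPreLook board start.1 start.2 ≠ some 0 ∧
          pvPreLook board start.1 start.2 = pvPreLook board end_.1 end_.2) →
        ∀ row ∈ board, (board.headD []).length ≤ row.length))
instance (board : List (List Int)) (start : Int × Int) (end_ : Int × Int) : Decidable (Pre_reference_can_connect_py board start end_) := by unfold Pre_reference_can_connect_py; infer_instance

def pvWitness_reference_can_connect_py : List (List Int) × (Int × Int) × (Int × Int) :=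
  ([[1, 0, 1], [0, 2, 0]], (0, 0), (0, 2))

def Spec_reference_can_connect_py (board : List (List Int)) (start : Int × Int) (end_ : Int × Int) (out : Bool) : Prop := out = reference_can_connect_py_alt board start end_
instance (board : List (List Int)) (start : Int × Int) (end_ : Int × Int) (out : Bool) : Decidable (Spec_reference_can_connect_py board start end_ out) := by unfold Spec_reference_can_connect_py; infer_instance

-- ===== CLAIM (what is proved, stated in full; the proofs are below) =====
def Claim_equal_reference_can_connect_py : Prop := ∀ (board : List (List Int)) (start : Int × Int) (end_ : Int × Int), Dom_reference_can_connect_py board start end_ → Pre_reference_can_connect_py board start end_ → Spec_reference_can_connect_py board start end_ (reference_can_connect_py board start end_)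

-- ===== LEMMAS AND PROOFS =====

-- ---------- shared: the ≤2-turns reachability predicate both programs decide ----------

def pvEnum : List (Int × Int × Int) := PySem.List.enumerate pvDirsA

inductive pvDeriv (pass : Int → Int → Bool) (sp : Int × Int) : Int → Int → Int → Int → Prop
  | base (p : Int × Int × Int) (hp : p ∈ pvEnum)
      (h : pass (sp.1 + p.2.1) (sp.2 + p.2.2) = true) :
      pvDeriv pass sp (sp.1 + p.2.1) (sp.2 + p.2.2) p.1 0
  | step (r c j t : Int) (p : Int × Int × Int) (hp : p ∈ pvEnum)
      (hd : pvDeriv pass sp r c j t) (ht : t + (if p.1 = j then 0 else 1) ≤ 2)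
      (h : pass (r + p.2.1) (c + p.2.2) = true) :
      pvDeriv pass sp (r + p.2.1) (c + p.2.2) p.1 (t + (if p.1 = j then 0 else 1))

def pvDerivEnd (pass : Int → Int → Bool) (sp ep : Int × Int) : Prop :=
  ∃ j t, pvDeriv pass sp ep.1 ep.2 j t

theorem pvDeriv_bounds {pass : Int → Int → Bool} {sp : Int × Int} {r c j t : Int}
    (h : pvDeriv pass sp r c j t) : 0 ≤ t ∧ t ≤ 2 := by
  induction h with
  | base p hp h => exact ⟨le_refl 0, by norm_num⟩
  | step r c j t p hp hd ht hpass ih =>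
      exact ⟨by rcases ih with ⟨h1, h2⟩; split <;> omega, ht⟩

theorem pvSet_mem_update {s : PySem.Set (Int × Int)} {l : List (Int × Int)} {x : Int × Int} :
    x ∈ PySem.Set.update s l ↔ x ∈ s ∨ x ∈ l := by
  induction l generalizing s with
  | nil => simp [PySem.Set.update]
  | cons a l ih =>
      have h0 : PySem.Set.update s (a :: l) = PySem.Set.update (s.add a) l := rfl
      rw [h0, ih, PySem.Set.mem_add]
      simp only [List.mem_cons]
      tauto

theorem pvMem_dirfold (board : List (List Int)) (rows cols : Int) (ep : Int × Int)
    (rc : Int × Int) (acc : PySem.Set (Int × Int)) (x : Int × Int) :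
    (x ∈ pvDirsB.foldl (fun acc dd =>
        PySem.Set.update acc (pvRayB board rows cols ep (pvRayFuel rows cols) rc.1 rc.2 dd.1 dd.2)) acc) ↔
      x ∈ acc ∨ ∃ dd ∈ pvDirsB, x ∈ pvRayB board rows cols ep (pvRayFuel rows cols) rc.1 rc.2 dd.1 dd.2 := by
  have h : ∀ (l : List (Int × Int)) (acc : PySem.Set (Int × Int)),
      (x ∈ l.foldl (fun acc dd =>
        PySem.Set.update acc (pvRayB board rows cols ep (pvRayFuel rows cols) rc.1 rc.2 dd.1 dd.2)) acc) ↔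
      x ∈ acc ∨ ∃ dd ∈ l, x ∈ pvRayB board rows cols ep (pvRayFuel rows cols) rc.1 rc.2 dd.1 dd.2 := by
    intro l
    induction l with
    | nil => simp
    | cons a l ih =>
        intro acc
        rw [List.foldl_cons, ih, pvSet_mem_update, or_assoc]
        apply or_congr_right
        simp only [List.mem_cons]
        constructor
        · rintro (h | ⟨dd, hdd, h⟩)
          · exact ⟨a, Or.inl rfl, h⟩
          · exact ⟨dd, Or.inr hdd, h⟩
        · rintro ⟨dd, hdd | hdd, h⟩
          · exact Or.inl (hdd ▸ h)
          · exact Or.inr ⟨dd, hdd, h⟩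
  exact h pvDirsB acc

theorem pvMem_expand (board : List (List Int)) (rows cols : Int) (ep : Int × Int)
    (cells : PySem.Set (Int × Int)) (x : Int × Int) :
    x ∈ pvExpandB board rows cols ep cells ↔
      x ∈ cells ∨ ∃ rc ∈ cells, ∃ dd ∈ pvDirsB,
        x ∈ pvRayB board rows cols ep (pvRayFuel rows cols) rc.1 rc.2 dd.1 dd.2 := by
  have h : ∀ (l : List (Int × Int)) (acc : PySem.Set (Int × Int)),
      (x ∈ l.foldl (fun acc rc => pvDirsB.foldl (fun acc dd =>
          PySem.Set.update acc (pvRayB board rows cols ep (pvRayFuel rows cols) rc.1 rc.2 dd.1 dd.2)) acc) acc) ↔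
      x ∈ acc ∨ ∃ rc ∈ l, ∃ dd ∈ pvDirsB,
        x ∈ pvRayB board rows cols ep (pvRayFuel rows cols) rc.1 rc.2 dd.1 dd.2 := by
    intro l
    induction l with
    | nil => simp
    | cons a l ih =>
        intro acc
        rw [List.foldl_cons, ih, pvMem_dirfold, or_assoc]
        apply or_congr_right
        simp only [List.mem_cons]
        constructor
        · rintro (⟨dd, hdd, h⟩ | ⟨rc, hrc, dd, hdd, h⟩)
          · exact ⟨a, Or.inl rfl, dd, hdd, h⟩
          · exact ⟨rc, Or.inr hrc, dd, hdd, h⟩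
        · rintro ⟨rc, hrc | hrc, dd, hdd, h⟩
          · exact Or.inl ⟨dd, hdd, hrc ▸ h⟩
          · exact Or.inr ⟨rc, hrc, dd, hdd, h⟩
  exact h cells cells

theorem pvRay_sound {board : List (List Int)} {rows cols : Int} {ep : Int × Int}
    {fuel : Nat} {r c dr dc : Int} {x : Int × Int}
    (h : x ∈ pvRayB board rows cols ep fuel r c dr dc) :
    ∃ k : Nat, 1 ≤ k ∧ x.1 = r + k * dr ∧ x.2 = c + k * dc ∧
      ∀ i : Nat, 1 ≤ i → i ≤ k → pvPassB board rows cols ep (r + i * dr) (c + i * dc) = true := by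
  induction fuel generalizing r c with
  | zero => simp [pvRayB] at h
  | succ fuel ih =>
      rw [pvRayB] at h
      by_cases hp : pvPassB board rows cols ep (r + dr) (c + dc) = true
      · rw [if_pos hp] at h
        rcases List.mem_cons.mp h with h | h
        · exact ⟨1, le_refl 1, by simp [h], by simp [h], by
            intro i h1 h2
            have : i = 1 := by omega
            subst this; simpa using hp⟩
        · obtain ⟨k, hk1, hx1, hx2, hall⟩ := ih h
          refine ⟨k + 1, by omega, by push_cast at hx1 ⊢; linarith [hx1], by push_cast at hx2 ⊢; linarith [hx2], ?_⟩
          intro i h1 h2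
          rcases Nat.eq_or_lt_of_le h1 with h1' | h1'
          · simpa [← h1'] using hp
          · have := hall (i - 1) (by omega) (by omega)
            have hi : ((i : Int)) * dr = dr + ((i - 1 : Nat) : Int) * dr := by
              push_cast [Nat.cast_sub (by omega : 1 ≤ i)]; ring
            have hi2 : ((i : Int)) * dc = dc + ((i - 1 : Nat) : Int) * dc := by
              push_cast [Nat.cast_sub (by omega : 1 ≤ i)]; ring
            rw [hi, hi2]
            convert this using 2 <;> ring
      · rw [if_neg hp] at h; simp at h

theorem pvRay_complete {board : List (List Int)} {rows cols : Int} {ep : Int × Int}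
    {r c dr dc : Int} {k fuel : Nat}
    (hk : 1 ≤ k) (hfuel : k ≤ fuel)
    (hall : ∀ i : Nat, 1 ≤ i → i ≤ k → pvPassB board rows cols ep (r + i * dr) (c + i * dc) = true) :
    (r + k * dr, c + k * dc) ∈ pvRayB board rows cols ep fuel r c dr dc := by
  induction k generalizing r c fuel with
  | zero => omega
  | succ k ih =>
      obtain ⟨fuel', rfl⟩ : ∃ f, fuel = f + 1 := ⟨fuel - 1, by omega⟩
      have h1 := hall 1 (le_refl 1) (by omega)
      simp only [Nat.cast_one, one_mul] at h1
      rw [pvRayB, if_pos h1]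
      rcases Nat.eq_zero_or_pos k with hk0 | hk0
      · subst hk0; simp
      · refine List.mem_cons_of_mem _ ?_
        have hstep := ih (r := r + dr) (c := c + dc) (fuel := fuel') hk0 (by omega)
          (fun i hi1 hi2 => by
            have h2 := hall (i + 1) (by omega) (by omega)
            have e1 : r + dr + (i : Int) * dr = r + ((i + 1 : Nat) : Int) * dr := by push_cast; ring
            have e2 : c + dc + (i : Int) * dc = c + ((i + 1 : Nat) : Int) * dc := by push_cast; ring
            rw [e1, e2]; exact h2)
        have e1 : r + ((k + 1 : Nat) : Int) * dr = r + dr + (k : Int) * dr := by push_cast; ring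
        have e2 : c + ((k + 1 : Nat) : Int) * dc = c + dc + (k : Int) * dc := by push_cast; ring
        rw [e1, e2]
        exact hstep

-- level sets: n-fold expansion of {sp}
def pvIterB (board : List (List Int)) (rows cols : Int) (ep sp : Int × Int) : Nat → PySem.Set (Int × Int)
  | 0 => PySem.Set.ofList [sp]
  | n + 1 => pvExpandB board rows cols ep (pvIterB board rows cols ep sp n)

theorem pvEnum_inj : ∀ p ∈ pvEnum, ∀ q ∈ pvEnum, p.1 = q.1 → p = q := by decide

theorem pvEnum_snd_mem : ∀ p ∈ pvEnum, p.2 ∈ pvDirsB := by decide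

theorem pvEnum_of_mem : ∀ dd ∈ pvDirsB, ∃ p ∈ pvEnum, p.2 = dd := by decide

theorem pvPassB_bounds {board : List (List Int)} {rows cols : Int} {ep : Int × Int} {r c : Int}
    (h : pvPassB board rows cols ep r c = true) :
    0 ≤ r ∧ r < rows + 2 ∧ 0 ≤ c ∧ c < cols + 2 := by
  unfold pvPassB at h
  split_ifs at h with h1
  all_goals first
    | (exact not_not.mp (fun hx => h1 (fun hy => hx hy)))
    | tauto

theorem pvRay_k_le {board : List (List Int)} {rows cols : Int} {ep : Int × Int}
    {r c dr dc : Int} {k : Nat}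
    (hd : (dr, dc) ∈ pvDirsB) (h0r : 0 ≤ rows) (h0c : 0 ≤ cols) (hk : 1 ≤ k)
    (h1 : pvPassB board rows cols ep (r + 1 * dr) (c + 1 * dc) = true)
    (h2 : pvPassB board rows cols ep (r + k * dr) (c + k * dc) = true) :
    k ≤ pvRayFuel rows cols := by
  have b1 := pvPassB_bounds h1
  have b2 := pvPassB_bounds h2
  unfold pvRayFuel
  fin_cases hd <;> simp only [mul_one, mul_zero, one_mul, add_zero, mul_neg] at b1 b2 <;> omega

theorem pvDeriv_ray_base {pass : Int → Int → Bool} {sp : Int × Int} {p : Int × Int × Int}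
    (hp : p ∈ pvEnum) (k : Nat) (hk : 1 ≤ k)
    (hall : ∀ i : Nat, 1 ≤ i → i ≤ k →
      pass (sp.1 + i * p.2.1) (sp.2 + i * p.2.2) = true) :
    pvDeriv pass sp (sp.1 + k * p.2.1) (sp.2 + k * p.2.2) p.1 0 := by
  induction k with
  | zero => omega
  | succ k ih =>
      rcases Nat.eq_zero_or_pos k with hk0 | hk0
      · subst hk0
        have := pvDeriv.base (pass := pass) (sp := sp) p hp
          (by simpa using hall 1 (le_refl 1) (le_refl 1))
        simpa using this
      · have hprev := ih hk0 (fun i hi1 hi2 => hall i hi1 (by omega))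
        have hstep := pvDeriv.step _ _ _ _ p hp hprev
          (by rw [if_pos rfl]; omega)
          (by
            have := hall (k + 1) (by omega) (le_refl _)
            have e1 : sp.1 + (k : Int) * p.2.1 + p.2.1 = sp.1 + ((k + 1 : Nat) : Int) * p.2.1 := by
              push_cast; ring
            have e2 : sp.2 + (k : Int) * p.2.2 + p.2.2 = sp.2 + ((k + 1 : Nat) : Int) * p.2.2 := by
              push_cast; ring
            rw [e1, e2]; exact this)
        rw [if_pos rfl, add_zero] at hstep
        have e1 : sp.1 + (k : Int) * p.2.1 + p.2.1 = sp.1 + ((k + 1 : Nat) : Int) * p.2.1 := by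
          push_cast; ring
        have e2 : sp.2 + (k : Int) * p.2.2 + p.2.2 = sp.2 + ((k + 1 : Nat) : Int) * p.2.2 := by
          push_cast; ring
        rw [e1, e2] at hstep
        exact hstep

theorem pvDeriv_ray_step {pass : Int → Int → Bool} {sp : Int × Int} {r c j0 t0 : Int}
    (hd : pvDeriv pass sp r c j0 t0) (ht : t0 + 1 ≤ 2) {p : Int × Int × Int}
    (hp : p ∈ pvEnum) (k : Nat) (hk : 1 ≤ k)
    (hall : ∀ i : Nat, 1 ≤ i → i ≤ k →
      pass (r + i * p.2.1) (c + i * p.2.2) = true) :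
    ∃ t, t ≤ t0 + 1 ∧ pvDeriv pass sp (r + k * p.2.1) (c + k * p.2.2) p.1 t := by
  have h0 := (pvDeriv_bounds hd).1
  induction k with
  | zero => omega
  | succ k ih =>
      rcases Nat.eq_zero_or_pos k with hk0 | hk0
      · subst hk0
        refine ⟨t0 + (if p.1 = j0 then 0 else 1), by split <;> omega, ?_⟩
        have := pvDeriv.step _ _ _ _ p hp hd (by split <;> omega)
          (by simpa using hall 1 (le_refl 1) (le_refl 1))
        simpa using this
      · obtain ⟨t, htle, hprev⟩ := ih hk0 (fun i hi1 hi2 => hall i hi1 (by omega))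
        refine ⟨t, htle, ?_⟩
        have hstep := pvDeriv.step _ _ _ _ p hp hprev (by rw [if_pos rfl]; omega)
          (by
            have := hall (k + 1) (by omega) (le_refl _)
            have e1 : r + (k : Int) * p.2.1 + p.2.1 = r + ((k + 1 : Nat) : Int) * p.2.1 := by
              push_cast; ring
            have e2 : c + (k : Int) * p.2.2 + p.2.2 = c + ((k + 1 : Nat) : Int) * p.2.2 := by
              push_cast; ring
            rw [e1, e2]; exact this)
        rw [if_pos rfl, add_zero] at hstep
        have e1 : r + (k : Int) * p.2.1 + p.2.1 = r + ((k + 1 : Nat) : Int) * p.2.1 := by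
          push_cast; ring
        have e2 : c + (k : Int) * p.2.2 + p.2.2 = c + ((k + 1 : Nat) : Int) * p.2.2 := by
          push_cast; ring
        rw [e1, e2] at hstep
        exact hstep

theorem pvIterB_sound {board : List (List Int)} {rows cols : Int} {ep sp : Int × Int} :
    ∀ n : Nat, n ≤ 3 → ∀ x ∈ pvIterB board rows cols ep sp n,
      x = sp ∨ ∃ j t, pvDeriv (pvPassB board rows cols ep) sp x.1 x.2 j t ∧ t + 1 ≤ n := by
  intro n
  induction n with
  | zero =>
      intro _ x hx
      rw [pvIterB, PySem.Set.mem_ofList] at hx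
      simpa using Or.inl (by simpa using hx)
  | succ n ih =>
      intro hn3 x hx
      rw [pvIterB, pvMem_expand] at hx
      rcases hx with hx | ⟨rc, hrc, dd, hdd, hray⟩
      · rcases ih (by omega) x hx with h | ⟨j, t, hD, hle⟩
        · exact Or.inl h
        · exact Or.inr ⟨j, t, hD, by omega⟩
      · obtain ⟨p, hp, hpd⟩ := pvEnum_of_mem dd hdd
        obtain ⟨k, hk1, hx1, hx2, hall⟩ := pvRay_sound hray
        rw [← hpd] at hall hx1 hx2
        rcases ih (by omega) rc hrc with hrcsp | ⟨j0, t0, hD0, hle0⟩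
        · subst hrcsp
          refine Or.inr ⟨p.1, 0, ?_, by omega⟩
          have := pvDeriv_ray_base hp k hk1 hall
          rwa [← hx1, ← hx2] at this
        · have ht2 : t0 + 1 ≤ 2 := by omega
          obtain ⟨t, htle, hD⟩ := pvDeriv_ray_step hD0 ht2 hp k hk1 hall
          refine Or.inr ⟨p.1, t, ?_, by omega⟩
          rwa [← hx1, ← hx2] at hD

theorem pvIterB_complete {board : List (List Int)} {rows cols : Int} {ep sp : Int × Int}
    (h0r : 0 ≤ rows) (h0c : 0 ≤ cols)
    {r c j t : Int} (hD : pvDeriv (pvPassB board rows cols ep) sp r c j t) :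
    ∃ p ∈ pvEnum, p.1 = j ∧ ∃ rc ∈ pvIterB board rows cols ep sp t.toNat, ∃ k : Nat,
      1 ≤ k ∧ r = rc.1 + k * p.2.1 ∧ c = rc.2 + k * p.2.2 ∧
      (∀ i : Nat, 1 ≤ i → i ≤ k →
        pvPassB board rows cols ep (rc.1 + i * p.2.1) (rc.2 + i * p.2.2) = true) := by
  induction hD with
  | base p hp h =>
      refine ⟨p, hp, rfl, sp, ?_, 1, le_refl 1, by simp, by simp, ?_⟩
      · rw [show (0 : Int).toNat = 0 from rfl, pvIterB, PySem.Set.mem_ofList]; simp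
      · intro i h1 h2
        have : i = 1 := by omega
        subst this; simpa using h
  | step r c j0 t0 p hp hd ht hpass ih =>
      obtain ⟨p0, hp0, hp0j, rc, hrc, k, hk1, hr, hc, hall⟩ := ih
      by_cases hsame : p.1 = j0
      · have hpp : p = p0 := pvEnum_inj p hp p0 hp0 (by rw [hsame, hp0j])
        rw [← hpp] at hr hc hall
        rw [if_pos hsame, add_zero]
        refine ⟨p, hp, hsame ▸ rfl, rc, hrc, k + 1, by omega, ?_, ?_, ?_⟩
        · rw [hr]; push_cast; ring
        · rw [hc]; push_cast; ring
        · intro i h1 h2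
          rcases Nat.lt_or_ge i (k + 1) with hik | hik
          · exact hall i h1 (by omega)
          · have : i = k + 1 := by omega
            subst this
            have e1 : rc.1 + ((k + 1 : Nat) : Int) * p.2.1 = r + p.2.1 := by
              rw [hr]; push_cast; ring
            have e2 : rc.2 + ((k + 1 : Nat) : Int) * p.2.2 = c + p.2.2 := by
              rw [hc]; push_cast; ring
            rw [e1, e2]; exact hpass
      · rw [if_neg hsame]
        have h00 := (pvDeriv_bounds hd).1
        have htoNat : (t0 + 1).toNat = t0.toNat + 1 := by omega
        have hrcmem : (r, c) ∈ pvIterB board rows cols ep sp (t0.toNat + 1) := by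
          rw [pvIterB, pvMem_expand]
          refine Or.inr ⟨rc, hrc, p0.2, pvEnum_snd_mem p0 hp0, ?_⟩
          have hfuel : k ≤ pvRayFuel rows cols := by
            have hb1 := hall 1 (le_refl 1) (by omega)
            have hbk := hall k (by omega) (le_refl k)
            exact pvRay_k_le (pvEnum_snd_mem p0 hp0) h0r h0c (by omega)
              (by simpa using hb1) hbk
          have := pvRay_complete hk1 hfuel hall
          rwa [← hr, ← hc] at this
        refine ⟨p, hp, rfl, (r, c), htoNat ▸ hrcmem, 1, le_refl 1, by simp, by simp, ?_⟩
        intro i h1 h2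
        have : i = 1 := by omega
        subst this; simpa using hpass

theorem pvIterB_mono {board : List (List Int)} {rows cols : Int} {ep sp : Int × Int}
    {n : Nat} {x : Int × Int} (h : x ∈ pvIterB board rows cols ep sp n) :
    x ∈ pvIterB board rows cols ep sp (n + 1) := by
  rw [pvIterB, pvMem_expand]; exact Or.inl h

-- ---------- A side: dictionary bookkeeping lemmas ----------

theorem pvDict_contains_eq {κ ν : Type} [BEq κ] (d : PySem.Dict κ ν) (k : κ) :
    d.contains k = (d.get? k).isSome := by
  cases d with
  | mk items =>
    show items.any (fun p => p.1 == k)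
        = (Option.map (fun x => x.2) (items.find? (fun p => p.1 == k))).isSome
    induction items with
    | nil => rfl
    | cons a l ih =>
        by_cases ha : (a.1 == k) = true
        · simp [List.find?_cons_of_pos ha, List.any_cons, ha]
        · have hb : (a.1 == k) = false := by simpa using ha
          have hskip : List.find? (fun p => p.1 == k) (a :: l)
              = List.find? (fun p => p.1 == k) l := List.find?_cons_of_neg (by simp [hb])
          simp [List.any_cons, hb, hskip, ih]

theorem pvDict_insert_fresh {κ ν : Type} [BEq κ] (d : PySem.Dict κ ν) (k : κ) (v : ν)
    (h : d.get? k = none) : (d.insert k v).items = d.items ++ [(k, v)] := by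
  show (if d.contains k = true then _ else PySem.Dict.mk (d.items ++ [(k, v)])).items = _
  rw [if_neg (by rw [pvDict_contains_eq, h]; simp)]

theorem pvDict_mem_insert {κ ν : Type} [BEq κ] [LawfulBEq κ] (d : PySem.Dict κ ν) (k : κ) (v : ν)
    (kv : κ × ν) : kv ∈ (d.insert k v).items ↔ kv = (k, v) ∨ (kv ∈ d.items ∧ kv.1 ≠ k) := by
  by_cases hc : d.contains k = true
  · show kv ∈ (if d.contains k = true then PySem.Dict.mk (d.items.map fun p => if (p.1 == k) = true then (k, v) else p) else _).items ↔ _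
    rw [if_pos hc]
    show kv ∈ d.items.map _ ↔ _
    rw [List.mem_map]
    constructor
    · rintro ⟨p, hp, rfl⟩
      by_cases hpk : (p.1 == k) = true
      · rw [if_pos hpk]; exact Or.inl rfl
      · rw [if_neg hpk]; exact Or.inr ⟨hp, by simpa using hpk⟩
    · rintro (rfl | ⟨hm, hne⟩)
      · unfold PySem.Dict.contains at hc
        rw [List.any_eq_true] at hc
        obtain ⟨p, hp, hpk⟩ := hc
        exact ⟨p, hp, by rw [if_pos hpk]⟩
      · exact ⟨kv, hm, by rw [if_neg (by simpa using hne)]⟩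
  · rw [show (d.insert k v) = PySem.Dict.mk (d.items ++ [(k, v)]) from by
      unfold PySem.Dict.insert; rw [if_neg hc]]
    show kv ∈ d.items ++ [(k, v)] ↔ _
    rw [List.mem_append]
    constructor
    · rintro (hm | hm)
      · refine Or.inr ⟨hm, ?_⟩
        intro hk
        apply hc
        unfold PySem.Dict.contains
        rw [List.any_eq_true]
        exact ⟨kv, hm, by simpa using hk⟩
      · exact Or.inl (by simpa using hm)
    · rintro (rfl | ⟨hm, _⟩)
      · simp
      · exact Or.inl hm

theorem pvDict_keys_insert_over {κ ν : Type} [BEq κ] [LawfulBEq κ] (d : PySem.Dict κ ν) (k : κ) (v : ν)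
    (h : d.contains k = true) : (d.insert k v).keys = d.keys := by
  unfold PySem.Dict.insert
  rw [if_pos h]
  show (d.items.map fun p => if (p.1 == k) = true then (k, v) else p).map (fun p => p.1)
      = d.items.map (fun p => p.1)
  rw [List.map_map]
  apply List.map_congr_left
  intro p hp
  by_cases hpk : (p.1 == k) = true
  · simp only [Function.comp_apply, if_pos hpk]
    exact (eq_of_beq hpk).symm
  · simp [Function.comp_apply, if_neg hpk]

theorem pvDict_keys_insert_fresh {κ ν : Type} [BEq κ] (d : PySem.Dict κ ν) (k : κ) (v : ν)
    (h : d.get? k = none) : (d.insert k v).keys = d.keys ++ [k] := by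
  show (d.insert k v).items.map (fun p => p.1) = d.items.map (fun p => p.1) ++ [k]
  rw [pvDict_insert_fresh d k v h, List.map_append]
  rfl

theorem pvDict_not_mem_keys_of_get?_none {κ ν : Type} [BEq κ] [LawfulBEq κ]
    (d : PySem.Dict κ ν) (k : κ) (h : d.get? k = none) : k ∉ d.keys := by
  intro hmem
  obtain ⟨p, hp, hpk⟩ := List.mem_map.mp hmem
  have hc : d.contains k = true := by
    unfold PySem.Dict.contains
    rw [List.any_eq_true]
    exact ⟨p, hp, by simp [hpk]⟩
  rw [pvDict_contains_eq, h] at hc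
  simp at hc

theorem pvDict_nodup_insert {κ ν : Type} [BEq κ] [LawfulBEq κ] (d : PySem.Dict κ ν) (k : κ) (v : ν)
    (h : d.keys.Nodup) : (d.insert k v).keys.Nodup := by
  rcases ho : d.get? k with _ | pt
  · rw [pvDict_keys_insert_fresh d k v ho]
    refine List.Nodup.append h (List.nodup_singleton k) ?_
    intro a ha hb
    rw [List.mem_singleton] at hb
    exact pvDict_not_mem_keys_of_get?_none d k ho (hb ▸ ha)
  · rw [pvDict_keys_insert_over d k v (by rw [pvDict_contains_eq, ho]; rfl)]
    exact h

theorem pvDict_sum_len_insert_over (d : PySem.Dict (Int × Int × Int) Int) (k : Int × Int × Int)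
    (pt v : Int) (hnd : d.keys.Nodup) (h : d.get? k = some pt) :
    ((d.insert k v).items.map (fun kv => kv.2.toNat)).sum + pt.toNat
        = (d.items.map (fun kv => kv.2.toNat)).sum + v.toNat
      ∧ (d.insert k v).items.length = d.items.length := by
  have hc : d.contains k = true := by rw [pvDict_contains_eq, h]; rfl
  have hitems : (d.insert k v).items
      = d.items.map (fun p => if (p.1 == k) = true then (k, v) else p) := by
    unfold PySem.Dict.insert
    rw [if_pos hc]
  rw [hitems, List.length_map]
  refine ⟨?_, rfl⟩
  have hfind : d.items.find? (fun p => p.1 == k) = some (k, pt) := by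
    rcases hf : d.items.find? (fun p => p.1 == k) with _ | p
    · rw [show d.get? k = (d.items.find? (fun p => p.1 == k)).map (fun x => x.2) from rfl, hf] at h
      simp at h
    · have h1 := List.find?_some hf
      simp only [] at h1
      have h2 : p.2 = pt := by
        rw [show d.get? k = (d.items.find? (fun p => p.1 == k)).map (fun x => x.2) from rfl, hf] at h
        simpa using h
      have h3 : p.1 = k := eq_of_beq h1
      rw [hf]
      rw [show p = (p.1, p.2) from rfl, h2, h3]
  have hndl : (d.items.map (fun p => p.1)).Nodup := hnd
  clear h hc hitems hnd
  generalize hgen : d.items = l at hfind hndl ⊢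
  clear hgen
  induction l with
  | nil => simp at hfind
  | cons a l ih =>
      by_cases ha : (a.1 == k) = true
      · have ha' := List.find?_cons_of_pos (l := l) (a := a) (p := fun q => q.1 == k) (by simpa using ha)
        rw [ha'] at hfind
        have hpt : a.2 = pt := by
          have : a = (k, pt) := by simpa using hfind
          rw [this]
        have hak : a.1 = k := eq_of_beq ha
        rw [List.map_cons] at hndl
        have hcons := List.nodup_cons.mp hndl
        have hnotin : ∀ p ∈ l, (p.1 == k) = false := by
          intro p hp
          have hne : p.1 ≠ a.1 := by
            intro hpe
            exact hcons.1 (hpe ▸ List.mem_map_of_mem hp)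
          rw [← hak]
          simpa using hne
        have hmap : l.map (fun p => if (p.1 == k) = true then (k, v) else p) = l := by
          have := List.map_congr_left (l := l)
            (f := fun p => if (p.1 == k) = true then (k, v) else p) (g := id)
            (fun p hp => by simp only [hnotin p hp]; simp)
          rw [this, List.map_id]
        simp only [List.map_cons, if_pos ha, hmap, List.sum_cons]
        rw [← hpt]
        omega
      · have ha' := List.find?_cons_of_neg (l := l) (a := a) (p := fun q => q.1 == k) (by simpa using ha)
        rw [ha'] at hfind
        rw [List.map_cons] at hndl
        have hnd' : (l.map (fun p => p.1)).Nodup := (List.nodup_cons.mp hndl).2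
        have hrec := ih hfind hnd'
        simp only [List.map_cons, if_neg ha, List.sum_cons]
        omega

-- ---------- A side: invariant machinery for the BFS loop ----------

def pvInBnd (prows pcols : Int) (k : Int × Int × Int) : Prop :=
  0 ≤ k.1 ∧ k.1 < prows ∧ 0 ≤ k.2.1 ∧ k.2.1 < pcols ∧ 0 ≤ k.2.2 ∧ k.2.2 < 4

def pvClosed (pass : Int → Int → Bool) (b : PySem.Dict (Int × Int × Int) Int)
    (r c d v : Int) (ds : List (Int × Int × Int)) : Prop :=
  ∀ p ∈ ds, v + (if p.1 = d then 0 else 1) ≤ 2 → pass (r + p.2.1) (c + p.2.2) = true →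
    ∃ u, b.get? (r + p.2.1, c + p.2.2, p.1) = some u ∧ u ≤ v + (if p.1 = d then 0 else 1)

def pvInv (pass : Int → Int → Bool) (sp ep : Int × Int) (prows pcols : Int)
    (q : List (Int × Int × Int × Int)) (b : PySem.Dict (Int × Int × Int) Int) : Prop :=
  b.keys.Nodup ∧
  (∀ e ∈ q, ∃ v, b.get? (e.1, e.2.1, e.2.2.1) = some v ∧ v ≤ e.2.2.2 ∧
      pvDeriv pass sp e.1 e.2.1 e.2.2.1 e.2.2.2) ∧
  (∀ kv ∈ b.items, pvDeriv pass sp kv.1.1 kv.1.2.1 kv.1.2.2 kv.2 ∧ pvInBnd prows pcols kv.1 ∧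
      ((kv.1.1, kv.1.2.1, kv.1.2.2, kv.2) ∈ q ∨ pvClosed pass b kv.1.1 kv.1.2.1 kv.1.2.2 kv.2 pvEnum)) ∧
  (∀ p ∈ pvEnum, pass (sp.1 + p.2.1) (sp.2 + p.2.2) = true →
      ∃ u, b.get? (sp.1 + p.2.1, sp.2 + p.2.2, p.1) = some u ∧ u ≤ 0) ∧
  (∀ kv ∈ b.items, (kv.1.1, kv.1.2.1) = ep → ∃ e ∈ q, (e.1, e.2.1) = ep)

def pvPhi (K : Nat) (b : PySem.Dict (Int × Int × Int) Int) : Nat :=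
  (b.items.map (fun kv => kv.2.toNat)).sum + 3 * (K - b.items.length)

theorem pvEnum_fst_bounds : ∀ p ∈ pvEnum, 0 ≤ p.1 ∧ p.1 < 4 := by decide

theorem pvEnum_delta_ne : ∀ p ∈ pvEnum, ¬(p.2.1 = 0 ∧ p.2.2 = 0) := by decide

-- a dict with Nodup, in-bounds keys has at most prows*pcols*4 entries
theorem pvKeys_card_le (prows pcols : Int) (l : List (Int × Int × Int))
    (hnd : l.Nodup) (hbnd : ∀ x ∈ l, pvInBnd prows pcols x) :
    l.length ≤ prows.toNat * (pcols.toNat * 4) := by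
  classical
  have hsub : l.toFinset ⊆ (Finset.Icc (0 : Int) (prows - 1)) ×ˢ
      ((Finset.Icc (0 : Int) (pcols - 1)) ×ˢ (Finset.Icc (0 : Int) 3)) := by
    intro x hx
    have hb := hbnd x (List.mem_toFinset.mp hx)
    obtain ⟨h1, h2, h3, h4, h5, h6⟩ := hb
    simp only [Finset.mem_product, Finset.mem_Icc]
    exact ⟨⟨h1, by omega⟩, ⟨h3, by omega⟩, ⟨h5, by omega⟩⟩
  have hcard := Finset.card_le_card hsub
  rw [List.toFinset_card_of_nodup hnd] at hcard
  simpa [Finset.card_product, Int.card_Icc] using hcard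

theorem pvPhi_insert_fresh {K : Nat} {prows pcols : Int}
    (b : PySem.Dict (Int × Int × Int) Int) (k : Int × Int × Int) (v : Int)
    (hnd : b.keys.Nodup) (hbnd : ∀ kv ∈ b.items, pvInBnd prows pcols kv.1)
    (hk : pvInBnd prows pcols k) (hnone : b.get? k = none)
    (hv0 : 0 ≤ v) (hv2 : v ≤ 2) (hK : K = prows.toNat * (pcols.toNat * 4)) :
    pvPhi K (b.insert k v) + 1 ≤ pvPhi K b := by
  have hitems := pvDict_insert_fresh b k v hnone
  have hkeys := pvDict_keys_insert_fresh b k v hnone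
  have hlen : (b.insert k v).items.length = b.items.length + 1 := by
    rw [hitems, List.length_append]; rfl
  have hsum : ((b.insert k v).items.map (fun kv => kv.2.toNat)).sum
      = (b.items.map (fun kv => kv.2.toNat)).sum + v.toNat := by
    rw [hitems, List.map_append, List.sum_append]; rfl
  have hcap : b.items.length + 1 ≤ K := by
    have hn : (b.insert k v).keys.Nodup := pvDict_nodup_insert b k v hnd
    rw [hkeys] at hn
    have hb2 : ∀ x ∈ b.keys ++ [k], pvInBnd prows pcols x := by
      intro x hx
      rcases List.mem_append.mp hx with hx | hx
      · obtain ⟨p, hp, rfl⟩ := List.mem_map.mp hx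
        exact hbnd p hp
      · rw [List.mem_singleton] at hx
        exact hx ▸ hk
    have := pvKeys_card_le prows pcols (b.keys ++ [k]) hn hb2
    rw [List.length_append] at this
    have hkl : b.keys.length = b.items.length := List.length_map ..
    simp only [List.length_singleton] at this
    omega
  unfold pvPhi
  rw [hlen, hsum]
  omega

theorem pvPhi_insert_over {K : Nat} (b : PySem.Dict (Int × Int × Int) Int)
    (k : Int × Int × Int) (pt v : Int) (hnd : b.keys.Nodup)
    (hsome : b.get? k = some pt) (hlt : v < pt) (h0 : 0 ≤ v) :
    pvPhi K (b.insert k v) + 1 ≤ pvPhi K b := by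
  obtain ⟨hsum, hlen⟩ := pvDict_sum_len_insert_over b k pt v hnd hsome
  unfold pvPhi
  rw [hlen]
  omega

-- "b' refines b": every stored bound only improves
def pvLe (b b' : PySem.Dict (Int × Int × Int) Int) : Prop :=
  ∀ k u, b.get? k = some u → ∃ u', b'.get? k = some u' ∧ u' ≤ u

theorem pvLe_insert (b : PySem.Dict (Int × Int × Int) Int) (k : Int × Int × Int) (v : Int)
    (h : ∀ pt, b.get? k = some pt → v ≤ pt) : pvLe b (b.insert k v) := by
  intro k' u hu
  rw [PySem.Dict.get?_insert]
  by_cases hk : k' = k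
  · subst hk
    exact ⟨v, by rw [if_pos rfl], h u hu⟩
  · exact ⟨u, by rw [if_neg hk, hu], le_refl u⟩

theorem pvClosed_mono {pass : Int → Int → Bool} {b b' : PySem.Dict (Int × Int × Int) Int}
    {r c d v : Int} {ds : List (Int × Int × Int)} (hle : pvLe b b')
    (h : pvClosed pass b r c d v ds) : pvClosed pass b' r c d v ds := by
  intro p hp h2 hpass
  obtain ⟨u, hu, hule⟩ := h p hp h2 hpass
  obtain ⟨u', hu', hu'le⟩ := hle _ u hu
  exact ⟨u', hu', le_trans hu'le hule⟩

theorem pvChkA_bounds {padded : List (List Int)} {prows pcols : Int} {ep : Int × Int}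
    {nr nc : Int} (h : pvChkA padded prows pcols ep nr nc = true) :
    0 ≤ nr ∧ nr < prows ∧ 0 ≤ nc ∧ nc < pcols := by
  unfold pvChkA at h
  simp only [Bool.and_eq_true, decide_eq_true_eq] at h
  tauto

-- mid-loop invariant while processing popped entry (r,c,d,t) over the direction list
def pvMid (pass : Int → Int → Bool) (sp ep : Int × Int) (prows pcols : Int)
    (r c d t : Int) (done : List (Int × Int × Int))
    (q : List (Int × Int × Int × Int)) (b : PySem.Dict (Int × Int × Int) Int) : Prop :=
  b.keys.Nodup ∧
  (∀ e ∈ q, ∃ v, b.get? (e.1, e.2.1, e.2.2.1) = some v ∧ v ≤ e.2.2.2 ∧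
      pvDeriv pass sp e.1 e.2.1 e.2.2.1 e.2.2.2) ∧
  (∀ kv ∈ b.items, pvDeriv pass sp kv.1.1 kv.1.2.1 kv.1.2.2 kv.2 ∧ pvInBnd prows pcols kv.1 ∧
      ((kv.1.1, kv.1.2.1, kv.1.2.2, kv.2) ∈ q ∨
        pvClosed pass b kv.1.1 kv.1.2.1 kv.1.2.2 kv.2 pvEnum ∨ kv.1 = (r, c, d))) ∧
  (∀ p ∈ pvEnum, pass (sp.1 + p.2.1) (sp.2 + p.2.2) = true →
      ∃ u, b.get? (sp.1 + p.2.1, sp.2 + p.2.2, p.1) = some u ∧ u ≤ 0) ∧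
  (∀ kv ∈ b.items, (kv.1.1, kv.1.2.1) = ep → ∃ e ∈ q, (e.1, e.2.1) = ep) ∧
  (∃ v0, b.get? (r, c, d) = some v0 ∧ v0 ≤ t ∧
      (v0 < t → ((r, c, d, v0) ∈ q ∨ pvClosed pass b r c d v0 pvEnum))) ∧
  pvClosed pass b r c d t done

theorem pvStep_insert {padded : List (List Int)} {prows pcols : Int} {sp ep : Int × Int}
    {K : Nat} (hK : K = prows.toNat * (pcols.toNat * 4))
    {r c d t : Int} {done : List (Int × Int × Int)}
    {q : List (Int × Int × Int × Int)} {b : PySem.Dict (Int × Int × Int) Int}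
    {p : Int × Int × Int} (hp : p ∈ pvEnum)
    (hD : pvDeriv (pvChkA padded prows pcols ep) sp r c d t)
    (hnd : b.keys.Nodup)
    (hI1 : ∀ e ∈ q, ∃ v, b.get? (e.1, e.2.1, e.2.2.1) = some v ∧ v ≤ e.2.2.2 ∧
        pvDeriv (pvChkA padded prows pcols ep) sp e.1 e.2.1 e.2.2.1 e.2.2.2)
    (hI2 : ∀ kv ∈ b.items, pvDeriv (pvChkA padded prows pcols ep) sp kv.1.1 kv.1.2.1 kv.1.2.2 kv.2 ∧
        pvInBnd prows pcols kv.1 ∧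
        ((kv.1.1, kv.1.2.1, kv.1.2.2, kv.2) ∈ q ∨
          pvClosed (pvChkA padded prows pcols ep) b kv.1.1 kv.1.2.1 kv.1.2.2 kv.2 pvEnum ∨
          kv.1 = (r, c, d)))
    (hI3 : ∀ p' ∈ pvEnum, pvChkA padded prows pcols ep (sp.1 + p'.2.1) (sp.2 + p'.2.2) = true →
        ∃ u, b.get? (sp.1 + p'.2.1, sp.2 + p'.2.2, p'.1) = some u ∧ u ≤ 0)
    (hI4 : ∀ kv ∈ b.items, (kv.1.1, kv.1.2.1) = ep → ∃ e ∈ q, (e.1, e.2.1) = ep)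
    (hv0get : b.get? (r, c, d) = some v0) (hv0le : v0 ≤ t)
    (hv0lt : v0 < t → ((r, c, d, v0) ∈ q ∨ pvClosed (pvChkA padded prows pcols ep) b r c d v0 pvEnum))
    (hCl : pvClosed (pvChkA padded prows pcols ep) b r c d t done)
    (hnt : ¬ t + (if p.1 = d then 0 else 1) > 2)
    (hchk : pvChkA padded prows pcols ep (r + p.2.1) (c + p.2.2) = true)
    (hfr : b.get? (r + p.2.1, c + p.2.2, p.1) = none ∨
        ∃ pt, b.get? (r + p.2.1, c + p.2.2, p.1) = some pt ∧ t + (if p.1 = d then 0 else 1) < pt) :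
    pvMid (pvChkA padded prows pcols ep) sp ep prows pcols r c d t (done ++ [p])
        (q ++ [(r + p.2.1, c + p.2.2, p.1, t + (if p.1 = d then 0 else 1))])
        (b.insert (r + p.2.1, c + p.2.2, p.1) (t + (if p.1 = d then 0 else 1))) ∧
      5 * pvPhi K (b.insert (r + p.2.1, c + p.2.2, p.1) (t + (if p.1 = d then 0 else 1))) +
          (q ++ [(r + p.2.1, c + p.2.2, p.1, t + (if p.1 = d then 0 else 1))]).length
        ≤ 5 * pvPhi K b + q.length := by
  set pass := pvChkA padded prows pcols ep with hpassdef
  set nt := t + (if p.1 = d then 0 else 1) with hntdef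
  set key : Int × Int × Int := (r + p.2.1, c + p.2.2, p.1) with hkeydef
  have ht0 : 0 ≤ t := (pvDeriv_bounds hD).1
  have hnt0 : 0 ≤ nt := by rw [hntdef]; split <;> omega
  have hntle : nt ≤ 2 := by omega
  have hkeyne : key ≠ (r, c, d) := by
    intro he
    have hd := pvEnum_delta_ne p hp
    rw [hkeydef] at he
    simp only [Prod.mk.injEq] at he
    exact hd ⟨by omega, by omega⟩
  have hle : pvLe b (b.insert key nt) := by
    apply pvLe_insert
    intro pt' hpt'
    rcases hfr with hfr | ⟨pt, hpt, hlt⟩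
    · rw [hfr] at hpt'; cases hpt'
    · rw [hpt] at hpt'
      injection hpt' with h
      omega
  have hDnew : pvDeriv pass sp (r + p.2.1) (c + p.2.2) p.1 nt :=
    pvDeriv.step r c d t p hp hD (by omega) hchk
  have hbnds : pvInBnd prows pcols key := by
    obtain ⟨h1, h2, h3, h4⟩ := pvChkA_bounds hchk
    have h5 := pvEnum_fst_bounds p hp
    exact ⟨h1, h2, h3, h4, h5.1, h5.2⟩
  have hgetnew : (b.insert key nt).get? key = some nt := by
    rw [PySem.Dict.get?_insert, if_pos rfl]
  constructor
  · refine ⟨pvDict_nodup_insert b key nt hnd, ?_, ?_, ?_, ?_, ?_, ?_⟩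
    · -- I1
      intro e he
      rcases List.mem_append.mp he with he | he
      · obtain ⟨v, hv, hvle, hvD⟩ := hI1 e he
        obtain ⟨v', hv', hv'le⟩ := hle _ v hv
        exact ⟨v', hv', le_trans hv'le hvle, hvD⟩
      · rw [List.mem_singleton] at he
        subst he
        exact ⟨nt, hgetnew, le_refl nt, hDnew⟩
    · -- I2
      intro kv hkv
      rcases (pvDict_mem_insert b key nt kv).mp hkv with rfl | ⟨hkv_old, hne⟩
      · exact ⟨hDnew, hbnds, Or.inl (List.mem_append_right _ (List.mem_singleton.mpr rfl))⟩
      · obtain ⟨hDkv, hbkv, hdisj⟩ := hI2 kv hkv_old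
        refine ⟨hDkv, hbkv, ?_⟩
        rcases hdisj with hdisj | hdisj | hdisj
        · exact Or.inl (List.mem_append_left _ hdisj)
        · exact Or.inr (Or.inl (pvClosed_mono hle hdisj))
        · exact Or.inr (Or.inr hdisj)
    · -- I3
      intro p' hp' hpass
      obtain ⟨u, hu, hule⟩ := hI3 p' hp' hpass
      obtain ⟨u', hu', hu'le⟩ := hle _ u hu
      exact ⟨u', hu', le_trans hu'le hule⟩
    · -- I4
      intro kv hkv hpos
      rcases (pvDict_mem_insert b key nt kv).mp hkv with rfl | ⟨hkv_old, _⟩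
      · exact ⟨(r + p.2.1, c + p.2.2, p.1, nt),
          List.mem_append_right _ (List.mem_singleton.mpr rfl), hpos⟩
      · obtain ⟨e, he, hpe⟩ := hI4 kv hkv_old hpos
        exact ⟨e, List.mem_append_left _ he, hpe⟩
    · -- popped key record
      refine ⟨v0, ?_, hv0le, ?_⟩
      · rw [PySem.Dict.get?_insert,
          if_neg (show ¬((r, c, d) = key) from fun h => hkeyne (Eq.symm h))]
        exact hv0get
      · intro hlt
        rcases hv0lt hlt with h | h
        · exact Or.inl (List.mem_append_left _ h)
        · exact Or.inr (pvClosed_mono hle h)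
    · -- ClosedOn done ++ [p]
      intro p' hp' h2 hpass
      rcases List.mem_append.mp hp' with hp' | hp'
      · obtain ⟨u, hu, hule⟩ := hCl p' hp' h2 hpass
        obtain ⟨u', hu', hu'le⟩ := hle _ u hu
        exact ⟨u', hu', le_trans hu'le hule⟩
      · rw [List.mem_singleton] at hp'
        subst hp'
        exact ⟨nt, hgetnew, le_refl nt⟩
  · -- measure decreases
    have hlen : (q ++ [(r + p.2.1, c + p.2.2, p.1, nt)]).length = q.length + 1 := by
      rw [List.length_append]; rfl
    have hphi : pvPhi K (b.insert key nt) + 1 ≤ pvPhi K b := by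
      rcases hfr with hfr | ⟨pt, hpt, hlt⟩
      · exact pvPhi_insert_fresh b key nt hnd (fun kv h => (hI2 kv h).2.1) hbnds hfr hnt0 hntle hK
      · exact pvPhi_insert_over b key pt nt hnd hpt hlt hnt0
    rw [hlen]
    omega

theorem pvStep_pres {padded : List (List Int)} {prows pcols : Int} {sp ep : Int × Int}
    {K : Nat} (hK : K = prows.toNat * (pcols.toNat * 4))
    {r c d t : Int} {done : List (Int × Int × Int)}
    {q : List (Int × Int × Int × Int)} {b : PySem.Dict (Int × Int × Int) Int}
    {p : Int × Int × Int} (hp : p ∈ pvEnum)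
    (hD : pvDeriv (pvChkA padded prows pcols ep) sp r c d t)
    (hm : pvMid (pvChkA padded prows pcols ep) sp ep prows pcols r c d t done q b) :
    pvMid (pvChkA padded prows pcols ep) sp ep prows pcols r c d t (done ++ [p])
        (pvBFSstep padded prows pcols ep r c d t (q, b) p).1
        (pvBFSstep padded prows pcols ep r c d t (q, b) p).2 ∧
      5 * pvPhi K (pvBFSstep padded prows pcols ep r c d t (q, b) p).2
          + (pvBFSstep padded prows pcols ep r c d t (q, b) p).1.length
        ≤ 5 * pvPhi K b + q.length := by
  obtain ⟨hnd, hI1, hI2, hI3, hI4, ⟨v0, hv0get, hv0le, hv0lt⟩, hCl⟩ := hm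
  set pass := pvChkA padded prows pcols ep with hpassdef
  -- the unchanged-state cases share this re-establishment of pvMid
  have hkeep : ∀ (hnew : t + (if p.1 = d then 0 else 1) ≤ 2 →
      pass (r + p.2.1) (c + p.2.2) = true →
      ∃ u, b.get? (r + p.2.1, c + p.2.2, p.1) = some u ∧ u ≤ t + (if p.1 = d then 0 else 1)),
      pvMid pass sp ep prows pcols r c d t (done ++ [p]) q b := by
    intro hnew
    refine ⟨hnd, hI1, hI2, hI3, hI4, ⟨v0, hv0get, hv0le, hv0lt⟩, ?_⟩
    intro p' hp' h2 hpass
    rcases List.mem_append.mp hp' with hp' | hp'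
    · exact hCl p' hp' h2 hpass
    · rw [List.mem_singleton] at hp'
      subst hp'
      exact hnew h2 hpass
  unfold pvBFSstep
  by_cases hnt : t + (if p.1 = d then 0 else 1) > 2
  · rw [if_pos hnt]
    exact ⟨hkeep (fun h2 _ => absurd h2 (by omega)), le_refl _⟩
  · rw [if_neg hnt]
    by_cases hchk : pass (r + p.2.1) (c + p.2.2) = true
    · rw [if_pos hchk]
      rcases hget : b.get? (r + p.2.1, c + p.2.2, p.1) with _ | pt <;> simp only [hget]
      · -- fresh insert
        exact pvStep_insert hK hp hD hnd hI1 hI2 hI3 hI4 hv0get hv0le hv0lt hCl hnt hchk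
          (Or.inl hget)
      · by_cases hple : pt ≤ t + (if p.1 = d then 0 else 1)
        · rw [if_pos hple]
          exact ⟨hkeep (fun _ _ => ⟨pt, hget, hple⟩), le_refl _⟩
        · rw [if_neg hple]
          exact pvStep_insert hK hp hD hnd hI1 hI2 hI3 hI4 hv0get hv0le hv0lt hCl hnt hchk
            (Or.inr ⟨pt, hget, by omega⟩)
    · rw [if_neg hchk]
      exact ⟨hkeep (fun _ hpass => absurd hpass hchk), le_refl _⟩

theorem pvFold_pres {padded : List (List Int)} {prows pcols : Int} {sp ep : Int × Int}
    {K : Nat} (hK : K = prows.toNat * (pcols.toNat * 4)) {r c d t : Int} :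
    ∀ (ds done : List (Int × Int × Int)) (q : List (Int × Int × Int × Int))
      (b : PySem.Dict (Int × Int × Int) Int),
      pvEnum = done ++ ds →
      pvDeriv (pvChkA padded prows pcols ep) sp r c d t →
      pvMid (pvChkA padded prows pcols ep) sp ep prows pcols r c d t done q b →
      pvMid (pvChkA padded prows pcols ep) sp ep prows pcols r c d t pvEnum
          (ds.foldl (pvBFSstep padded prows pcols ep r c d t) (q, b)).1
          (ds.foldl (pvBFSstep padded prows pcols ep r c d t) (q, b)).2 ∧
        5 * pvPhi K (ds.foldl (pvBFSstep padded prows pcols ep r c d t) (q, b)).2 +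
            (ds.foldl (pvBFSstep padded prows pcols ep r c d t) (q, b)).1.length
          ≤ 5 * pvPhi K b + q.length := by
  intro ds
  induction ds with
  | nil =>
      intro done q b heq hD hm
      rw [List.append_nil] at heq
      subst heq
      exact ⟨hm, le_refl _⟩
  | cons p ds ih =>
      intro done q b heq hD hm
      have hp : p ∈ pvEnum := by rw [heq]; exact List.mem_append_right _ (List.mem_cons_self ..)
      obtain ⟨hm', hle'⟩ := pvStep_pres hK hp hD hm
      rw [List.foldl_cons]
      have heq' : pvEnum = (done ++ [p]) ++ ds := by rw [heq, List.append_assoc]; rfl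
      obtain ⟨hm'', hle''⟩ := ih (done ++ [p])
        (pvBFSstep padded prows pcols ep r c d t (q, b) p).1
        (pvBFSstep padded prows pcols ep r c d t (q, b) p).2 heq' hD hm'
      refine ⟨by simpa using hm'', ?_⟩
      calc 5 * pvPhi K ((p :: ds).foldl (pvBFSstep padded prows pcols ep r c d t) (q, b)).2 +
            ((p :: ds).foldl (pvBFSstep padded prows pcols ep r c d t) (q, b)).1.length
          = 5 * pvPhi K (ds.foldl (pvBFSstep padded prows pcols ep r c d t)
              ((pvBFSstep padded prows pcols ep r c d t (q, b) p).1,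
               (pvBFSstep padded prows pcols ep r c d t (q, b) p).2)).2 +
            (ds.foldl (pvBFSstep padded prows pcols ep r c d t)
              ((pvBFSstep padded prows pcols ep r c d t (q, b) p).1,
               (pvBFSstep padded prows pcols ep r c d t (q, b) p).2)).1.length := by
            rw [List.foldl_cons]
        _ ≤ _ := le_trans hle'' hle'

-- entering the per-entry processing: pvInv for (e :: q) yields pvMid with done = []
theorem pvMid_init {pass : Int → Int → Bool} {sp ep : Int × Int} {prows pcols : Int}
    {e : Int × Int × Int × Int} {q : List (Int × Int × Int × Int)}
    {b : PySem.Dict (Int × Int × Int) Int}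
    (hInv : pvInv pass sp ep prows pcols (e :: q) b) (hne : (e.1, e.2.1) ≠ ep) :
    pvMid pass sp ep prows pcols e.1 e.2.1 e.2.2.1 e.2.2.2 [] q b ∧
      pvDeriv pass sp e.1 e.2.1 e.2.2.1 e.2.2.2 := by
  obtain ⟨hnd, hI1, hI2, hI3, hI4⟩ := hInv
  obtain ⟨v0, hv0, hv0le, hv0D⟩ := hI1 e (List.mem_cons_self ..)
  refine ⟨⟨hnd, ?_, ?_, hI3, ?_, ⟨v0, hv0, hv0le, ?_⟩, ?_⟩, hv0D⟩
  · intro e' he'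
    exact hI1 e' (List.mem_cons_of_mem _ he')
  · intro kv hkv
    obtain ⟨hDkv, hbkv, hdisj⟩ := hI2 kv hkv
    refine ⟨hDkv, hbkv, ?_⟩
    rcases hdisj with hdisj | hdisj
    · rcases List.mem_cons.mp hdisj with hdisj | hdisj
      · refine Or.inr (Or.inr ?_)
        simp only [Prod.ext_iff] at hdisj ⊢
        exact ⟨hdisj.1, hdisj.2.1, hdisj.2.2.1⟩
      · exact Or.inl hdisj
    · exact Or.inr (Or.inl hdisj)
  · intro kv hkv hpos
    obtain ⟨e', he', hpe⟩ := hI4 kv hkv hpos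
    rcases List.mem_cons.mp he' with rfl | he'
    · exact absurd hpe hne
    · exact ⟨e', he', hpe⟩
  · intro hlt
    obtain ⟨hDkv, hbkv, hdisj⟩ := hI2 ((e.1, e.2.1, e.2.2.1), v0)
      (PySem.Dict.mem_items_of_get?_eq_some b hv0)
    rcases hdisj with hdisj | hdisj
    · rcases List.mem_cons.mp hdisj with hdisj | hdisj
      · exfalso
        have : v0 = e.2.2.2 := congrArg (fun x => x.2.2.2) hdisj
        omega
      · exact Or.inl hdisj
    · exact Or.inr hdisj
  · intro p' hp' _ _
    exact absurd hp' (List.not_mem_nil)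

-- leaving the per-entry processing: pvMid with done = pvEnum restores pvInv
theorem pvMid_final {pass : Int → Int → Bool} {sp ep : Int × Int} {prows pcols : Int}
    {r c d t : Int} {q : List (Int × Int × Int × Int)}
    {b : PySem.Dict (Int × Int × Int) Int}
    (hm : pvMid pass sp ep prows pcols r c d t pvEnum q b) :
    pvInv pass sp ep prows pcols q b := by
  obtain ⟨hnd, hI1, hI2, hI3, hI4, ⟨v0, hv0, hv0le, hv0lt⟩, hCl⟩ := hm
  refine ⟨hnd, hI1, ?_, hI3, hI4⟩
  intro kv hkv
  obtain ⟨hDkv, hbkv, hdisj⟩ := hI2 kv hkv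
  refine ⟨hDkv, hbkv, ?_⟩
  rcases hdisj with hdisj | hdisj | hdisj
  · exact Or.inl hdisj
  · exact Or.inr hdisj
  · -- kv is the popped key; its stored value is v0
    have hget : b.get? kv.1 = some kv.2 :=
      PySem.Dict.get?_of_mem_items b hkv hnd
    rw [hdisj, hv0] at hget
    injection hget with hveq
    rcases eq_or_lt_of_le hv0le with hv0t | hv0t
    · refine Or.inr ?_
      have : pvClosed pass b kv.1.1 kv.1.2.1 kv.1.2.2 kv.2 pvEnum := by
        have h1 : kv.1.1 = r := by rw [hdisj]
        have h2 : kv.1.2.1 = c := by rw [hdisj]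
        have h3 : kv.1.2.2 = d := by rw [hdisj]
        rw [h1, h2, h3, ← hveq, hv0t]
        exact hCl
      exact this
    · rcases hv0lt hv0t with h | h
      · refine Or.inl ?_
        have h1 : kv.1.1 = r := by rw [hdisj]
        have h2 : kv.1.2.1 = c := by rw [hdisj]
        have h3 : kv.1.2.2 = d := by rw [hdisj]
        rw [h1, h2, h3, ← hveq]
        exact h
      · refine Or.inr ?_
        have h1 : kv.1.1 = r := by rw [hdisj]
        have h2 : kv.1.2.1 = c := by rw [hdisj]
        have h3 : kv.1.2.2 = d := by rw [hdisj]
        rw [h1, h2, h3, ← hveq]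
        exact h

-- with an empty queue the dictionary is closed: nothing derivable is missing
theorem pvInv_empty {pass : Int → Int → Bool} {sp ep : Int × Int} {prows pcols : Int}
    {b : PySem.Dict (Int × Int × Int) Int}
    (hInv : pvInv pass sp ep prows pcols [] b) :
    ∀ r c j t, pvDeriv pass sp r c j t →
      (r, c) ≠ ep ∧ ∃ u, b.get? (r, c, j) = some u ∧ u ≤ t := by
  obtain ⟨hnd, hI1, hI2, hI3, hI4⟩ := hInv
  intro r c j t hD
  induction hD with
  | base p hp h =>
      obtain ⟨u, hu, hule⟩ := hI3 p hp h
      refine ⟨?_, u, hu, hule⟩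
      intro hpe
      obtain ⟨e, he, _⟩ := hI4 ((sp.1 + p.2.1, sp.2 + p.2.2, p.1), u)
        (PySem.Dict.mem_items_of_get?_eq_some b hu) hpe
      exact absurd he (List.not_mem_nil)
  | step r c j0 t0 p hp hd ht hpass ih =>
      obtain ⟨hnep, u, hu, hule⟩ := ih
      obtain ⟨hDkv, hbkv, hdisj⟩ := hI2 ((r, c, j0), u)
        (PySem.Dict.mem_items_of_get?_eq_some b hu)
      rcases hdisj with hdisj | hdisj
      · exact absurd hdisj (List.not_mem_nil)
      · obtain ⟨w, hw, hwle⟩ := hdisj p hp (by split_ifs at * <;> omega) hpass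
        refine ⟨?_, w, hw, by split_ifs at * <;> omega⟩
        intro hpe
        obtain ⟨e, he, _⟩ := hI4 ((r + p.2.1, c + p.2.2, p.1), w)
          (PySem.Dict.mem_items_of_get?_eq_some b hw) hpe
        exact absurd he (List.not_mem_nil)

theorem pvLoop_iff {padded : List (List Int)} {prows pcols : Int} {sp ep : Int × Int}
    {K : Nat} (hK : K = prows.toNat * (pcols.toNat * 4)) :
    ∀ (fuel : Nat) (q : List (Int × Int × Int × Int)) (b : PySem.Dict (Int × Int × Int) Int),
      pvInv (pvChkA padded prows pcols ep) sp ep prows pcols q b →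
      5 * pvPhi K b + q.length < fuel →
      (pvBFSloop padded prows pcols ep fuel q b = true ↔
        pvDerivEnd (pvChkA padded prows pcols ep) sp ep) := by
  intro fuel
  induction fuel with
  | zero => intro q b _ hM; omega
  | succ fuel ih =>
      intro q b hInv hM
      cases q with
      | nil =>
          show false = true ↔ _
          simp only [Bool.false_eq_true, false_iff]
          rintro ⟨j, t, hD⟩
          exact (pvInv_empty hInv ep.1 ep.2 j t hD).1 rfl
      | cons e q =>
          show (if (e.1, e.2.1) = ep then true else _) = true ↔ _
          by_cases hpe : (e.1, e.2.1) = ep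
          · rw [if_pos hpe]
            simp only [true_iff]
            obtain ⟨_, hI1, _⟩ := hInv
            obtain ⟨v, _, _, hD⟩ := hI1 e (List.mem_cons_self ..)
            have h1 : e.1 = ep.1 := congrArg Prod.fst hpe
            have h2 : e.2.1 = ep.2 := congrArg Prod.snd hpe
            exact ⟨e.2.2.1, e.2.2.2, h1 ▸ h2 ▸ hD⟩
          · rw [if_neg hpe]
            obtain ⟨hm, hD⟩ := pvMid_init hInv hpe
            obtain ⟨hm', hle'⟩ := pvFold_pres (ep := ep) hK pvEnum [] q b rfl hD hm
            have hInv' := pvMid_final hm'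
            have hM' : 5 * pvPhi K ((PySem.List.enumerate pvDirsA).foldl
                (pvBFSstep padded prows pcols ep e.1 e.2.1 e.2.2.1 e.2.2.2) (q, b)).2 +
                ((PySem.List.enumerate pvDirsA).foldl
                (pvBFSstep padded prows pcols ep e.1 e.2.1 e.2.2.1 e.2.2.2) (q, b)).1.length
                < fuel := by
              have : (e :: q).length = q.length + 1 := rfl
              have hle'' := hle'
              rw [show pvEnum = PySem.List.enumerate pvDirsA from rfl] at hle''
              omega
            exact ih _ _ hInv' hM'

-- the seeding loop establishes the invariant with all-zero values and at most 4 entries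
theorem pvInit_inv {padded : List (List Int)} {prows pcols : Int} {sp ep : Int × Int} :
    pvInv (pvChkA padded prows pcols ep) sp ep prows pcols
        (pvBFSinit padded prows pcols ep sp).1 (pvBFSinit padded prows pcols ep sp).2 ∧
      (pvBFSinit padded prows pcols ep sp).1.length ≤ 4 ∧
      (∀ kv ∈ (pvBFSinit padded prows pcols ep sp).2.items, kv.2 = (0 : Int)) := by
  set pass := pvChkA padded prows pcols ep with hpassdef
  have main : ∀ (ds done : List (Int × Int × Int))
      (q : List (Int × Int × Int × Int)) (b : PySem.Dict (Int × Int × Int) Int),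
      pvEnum = done ++ ds →
      b.keys.Nodup →
      (∀ e ∈ q, ∃ v, b.get? (e.1, e.2.1, e.2.2.1) = some v ∧ v ≤ e.2.2.2 ∧
          pvDeriv pass sp e.1 e.2.1 e.2.2.1 e.2.2.2) →
      (∀ kv ∈ b.items, pvDeriv pass sp kv.1.1 kv.1.2.1 kv.1.2.2 kv.2 ∧
          pvInBnd prows pcols kv.1 ∧ (kv.1.1, kv.1.2.1, kv.1.2.2, kv.2) ∈ q) →
      (∀ p ∈ done, pass (sp.1 + p.2.1) (sp.2 + p.2.2) = true →
          ∃ u, b.get? (sp.1 + p.2.1, sp.2 + p.2.2, p.1) = some u ∧ u ≤ 0) →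
      (∀ kv ∈ b.items, kv.2 = (0 : Int)) →
      q.length ≤ done.length →
      let qb := ds.foldl (fun qb p =>
        if pvChkA padded prows pcols ep (sp.1 + p.2.1) (sp.2 + p.2.2) then
          (qb.1 ++ [(sp.1 + p.2.1, sp.2 + p.2.2, p.1, 0)],
            qb.2.insert (sp.1 + p.2.1, sp.2 + p.2.2, p.1) 0)
        else qb) (q, b)
      qb.2.keys.Nodup ∧
      (∀ e ∈ qb.1, ∃ v, qb.2.get? (e.1, e.2.1, e.2.2.1) = some v ∧ v ≤ e.2.2.2 ∧
          pvDeriv pass sp e.1 e.2.1 e.2.2.1 e.2.2.2) ∧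
      (∀ kv ∈ qb.2.items, pvDeriv pass sp kv.1.1 kv.1.2.1 kv.1.2.2 kv.2 ∧
          pvInBnd prows pcols kv.1 ∧ (kv.1.1, kv.1.2.1, kv.1.2.2, kv.2) ∈ qb.1) ∧
      (∀ p ∈ done ++ ds, pass (sp.1 + p.2.1) (sp.2 + p.2.2) = true →
          ∃ u, qb.2.get? (sp.1 + p.2.1, sp.2 + p.2.2, p.1) = some u ∧ u ≤ 0) ∧
      (∀ kv ∈ qb.2.items, kv.2 = (0 : Int)) ∧
      qb.1.length ≤ (done ++ ds).length := by
    intro ds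
    induction ds with
    | nil =>
        intro done q b heq hnd hI1 hIt hI3 hz hlen
        exact ⟨hnd, hI1, hIt, by simpa using hI3, hz, by simpa using hlen⟩
    | cons p ds ihds =>
        intro done q b heq hnd hI1 hIt hI3 hz hlen
        have hp : p ∈ pvEnum := by rw [heq]; exact List.mem_append_right _ (List.mem_cons_self ..)
        simp only [List.foldl_cons]
        by_cases hchk : pvChkA padded prows pcols ep (sp.1 + p.2.1) (sp.2 + p.2.2) = true
        · rw [if_pos hchk]
          set key : Int × Int × Int := (sp.1 + p.2.1, sp.2 + p.2.2, p.1) with hkeydef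
          have hle : pvLe b (b.insert key 0) := by
            apply pvLe_insert
            intro pt hpt
            have := hz (key, pt) (PySem.Dict.mem_items_of_get?_eq_some b hpt)
            simp only at this
            omega
          have hDnew : pvDeriv pass sp (sp.1 + p.2.1) (sp.2 + p.2.2) p.1 0 := pvDeriv.base p hp hchk
          have hgetnew : (b.insert key 0).get? key = some 0 := by
            rw [PySem.Dict.get?_insert, if_pos rfl]
          have hbnds : pvInBnd prows pcols key := by
            obtain ⟨h1, h2, h3, h4⟩ := pvChkA_bounds hchk
            have h5 := pvEnum_fst_bounds p hp
            exact ⟨h1, h2, h3, h4, h5.1, h5.2⟩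
          have hres := ihds (done ++ [p]) (q ++ [(sp.1 + p.2.1, sp.2 + p.2.2, p.1, 0)])
            (b.insert key 0)
            (by rw [heq, List.append_assoc]; rfl)
            (pvDict_nodup_insert b key 0 hnd)
            (by
              intro e he
              rcases List.mem_append.mp he with he | he
              · obtain ⟨v, hv, hvle, hvD⟩ := hI1 e he
                obtain ⟨v', hv', hv'le⟩ := hle _ v hv
                exact ⟨v', hv', le_trans hv'le hvle, hvD⟩
              · rw [List.mem_singleton] at he
                subst he
                exact ⟨0, hgetnew, le_refl 0, hDnew⟩)
            (by
              intro kv hkv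
              rcases (pvDict_mem_insert b key 0 kv).mp hkv with rfl | ⟨hkv_old, _⟩
              · exact ⟨hDnew, hbnds, List.mem_append_right _ (List.mem_singleton.mpr rfl)⟩
              · obtain ⟨hDkv, hbkv, hmem⟩ := hIt kv hkv_old
                exact ⟨hDkv, hbkv, List.mem_append_left _ hmem⟩)
            (by
              intro p' hp' hpass
              rcases List.mem_append.mp hp' with hp' | hp'
              · obtain ⟨u, hu, hule⟩ := hI3 p' hp' hpass
                obtain ⟨u', hu', hu'le⟩ := hle _ u hu
                exact ⟨u', hu', le_trans hu'le hule⟩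
              · rw [List.mem_singleton] at hp'
                subst hp'
                exact ⟨0, hgetnew, le_refl 0⟩)
            (by
              intro kv hkv
              rcases (pvDict_mem_insert b key 0 kv).mp hkv with rfl | ⟨hkv_old, _⟩
              · rfl
              · exact hz kv hkv_old)
            (by
              rw [List.length_append, List.length_append]
              simpa using hlen)
          refine ⟨hres.1, hres.2.1, hres.2.2.1, ?_, hres.2.2.2.2.1, ?_⟩
          · intro p' hp' hpass
            apply hres.2.2.2.1 p'
            · rcases List.mem_append.mp hp' with hp' | hp'
              · exact List.mem_append_left _ (List.mem_append_left _ hp')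
              · rcases List.mem_cons.mp hp' with rfl | hp'
                · exact List.mem_append_left _ (List.mem_append_right _ (List.mem_singleton.mpr rfl))
                · exact List.mem_append_right _ hp'
            · exact hpass
          · have := hres.2.2.2.2.2
            simp only [List.length_append, List.length_cons, List.length_nil] at *
            omega
        · rw [if_neg hchk]
          have hres := ihds (done ++ [p]) q b
            (by rw [heq, List.append_assoc]; rfl)
            hnd hI1 hIt
            (by
              intro p' hp' hpass
              rcases List.mem_append.mp hp' with hp' | hp'
              · exact hI3 p' hp' hpass
              · rw [List.mem_singleton] at hp'
                subst hp'
                exact absurd hpass hchk)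
            hz
            (by rw [List.length_append]; omega)
          refine ⟨hres.1, hres.2.1, hres.2.2.1, ?_, hres.2.2.2.2.1, ?_⟩
          · intro p' hp' hpass
            apply hres.2.2.2.1 p'
            · rcases List.mem_append.mp hp' with hp' | hp'
              · exact List.mem_append_left _ (List.mem_append_left _ hp')
              · rcases List.mem_cons.mp hp' with rfl | hp'
                · exact List.mem_append_left _ (List.mem_append_right _ (List.mem_singleton.mpr rfl))
                · exact List.mem_append_right _ hp'
            · exact hpass
          · have := hres.2.2.2.2.2
            simp only [List.length_append, List.length_cons, List.length_nil] at *
            omega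
  have hres := main pvEnum [] [] PySem.Dict.empty rfl (by exact List.nodup_nil)
    (by intro e he; exact absurd he (List.not_mem_nil))
    (by intro kv hkv; exact absurd hkv (List.not_mem_nil))
    (by intro p hp _; exact absurd hp (List.not_mem_nil))
    (by intro kv hkv; exact absurd hkv (List.not_mem_nil))
    (by exact le_refl _)
  obtain ⟨hnd, hI1, hIt, hI3, hz, hlen⟩ := hres
  refine ⟨⟨hnd, hI1, ?_, by simpa using hI3, ?_⟩, by simpa using hlen, hz⟩
  · intro kv hkv
    obtain ⟨hDkv, hbkv, hmem⟩ := hIt kv hkv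
    exact ⟨hDkv, hbkv, Or.inl hmem⟩
  · intro kv hkv hpos
    obtain ⟨hDkv, hbkv, hmem⟩ := hIt kv hkv
    exact ⟨(kv.1.1, kv.1.2.1, kv.1.2.2, kv.2), hmem, hpos⟩

theorem pvPhi_le_of_zero {K : Nat} {b : PySem.Dict (Int × Int × Int) Int}
    (hz : ∀ kv ∈ b.items, kv.2 = (0 : Int)) : pvPhi K b ≤ 3 * K := by
  unfold pvPhi
  have hsum : (b.items.map (fun kv => kv.2.toNat)).sum = 0 := by
    apply List.sum_eq_zero
    intro x hx
    obtain ⟨kv, hkv, rfl⟩ := List.mem_map.mp hx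
    rw [hz kv hkv]
    rfl
  rw [hsum]
  omega

-- ---------- the padded grid of A looks up exactly what B's passable test reads ----------

theorem pvRowFold_length (g : Nat → Int) (cs : List Nat) (l0 : List Int) :
    (cs.foldl (fun l col => l.set (col + 1) (g col)) l0).length = l0.length := by
  induction cs generalizing l0 with
  | nil => rfl
  | cons a cs ih => rw [List.foldl_cons, ih, List.length_set]

theorem pvRowFold_getD (g : Nat → Int) (n : Nat) (l0 : List Int) (hn : n < l0.length) (c : Nat) :
    ((List.range n).foldl (fun l col => l.set (col + 1) (g col)) l0).getD c 0 =
      if 1 ≤ c ∧ c ≤ n then g (c - 1) else l0.getD c 0 := by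
  induction n with
  | zero => simp; omega
  | succ n ih =>
      rw [List.range_succ, List.foldl_append, List.foldl_cons, List.foldl_nil]
      have hlen : ((List.range n).foldl (fun l col => l.set (col + 1) (g col)) l0).length
          = l0.length := pvRowFold_length g _ l0
      rw [List.getD_eq_getElem?_getD, List.getElem?_set, hlen]
      by_cases hc : n + 1 = c
      · rw [if_pos hc, if_pos (by omega)]
        rw [if_pos (by omega)]
        simp only [Option.getD_some]
        congr 1
        omega
      · rw [if_neg hc, ← List.getD_eq_getElem?_getD, ih (by omega)]
        split_ifs <;> first | rfl | omega

theorem pvInner_eq (board : List (List Int)) (row : Nat) (cs : List Nat)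
    (p : List (List Int)) (h : row + 1 < p.length) :
    cs.foldl (fun p col =>
        p.set (row + 1) ((p.getD (row + 1) []).set (col + 1) ((board.getD row []).getD col 0))) p
      = p.set (row + 1)
          (cs.foldl (fun l col => l.set (col + 1) ((board.getD row []).getD col 0))
            (p.getD (row + 1) [])) := by
  induction cs generalizing p with
  | nil =>
      rw [List.foldl_nil, List.foldl_nil, List.getD_eq_getElem?_getD,
        List.getElem?_eq_getElem h]
      simp only [Option.getD_some]
      exact (List.set_getElem_self h).symm
  | cons a cs ih =>
      have hinit : (p.set (row + 1)
            ((p.getD (row + 1) []).set (a + 1) ((board.getD row []).getD a 0))).getD (row + 1) []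
          = (p.getD (row + 1) []).set (a + 1) ((board.getD row []).getD a 0) := by
        rw [List.getD_eq_getElem?_getD, List.getElem?_set, if_pos rfl, if_pos h]
        rfl
      rw [List.foldl_cons, List.foldl_cons, ih _ (by rw [List.length_set]; exact h),
        List.set_set, hinit]

theorem pvGrid_length (board : List (List Int)) (cols : Nat) (rs : List Nat)
    (p : List (List Int)) :
    (rs.foldl (fun p row => (List.range cols).foldl (fun p col =>
        p.set (row + 1) ((p.getD (row + 1) []).set (col + 1) ((board.getD row []).getD col 0))) p)
      p).length = p.length := by
  induction rs generalizing p with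
  | nil => rfl
  | cons a rs ih =>
      rw [List.foldl_cons, ih]
      clear ih
      induction List.range cols generalizing p with
      | nil => rfl
      | cons b cs ih2 => rw [List.foldl_cons, ih2, List.length_set]

theorem pvRow_len_pres (p : List (List Int)) (j : Nat) (X : List Int)
    (hX : X.length = (p.getD j []).length) (i : Nat) :
    ((p.set j X).getD i []).length = (p.getD i []).length := by
  rw [List.getD_eq_getElem?_getD, List.getElem?_set, List.getD_eq_getElem?_getD]
  by_cases hj : j = i
  · subst hj
    by_cases hl : j < p.length
    · rw [if_pos rfl, if_pos hl]
      rw [List.getD_eq_getElem?_getD, List.getElem?_eq_getElem hl] at hX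
      rw [List.getElem?_eq_getElem hl]
      exact hX
    · rw [if_pos rfl, if_neg hl]
      try rw [List.getElem?_eq_none (by omega)]
      try rfl
  · rw [if_neg hj]

theorem pvInnerFold_rowlen (board : List (List Int)) (row : Nat) (cs : List Nat) :
    ∀ (p : List (List Int)) (i : Nat),
      ((cs.foldl (fun p col =>
          p.set (row + 1) ((p.getD (row + 1) []).set (col + 1) ((board.getD row []).getD col 0))) p).getD i []).length
        = (p.getD i []).length := by
  induction cs with
  | nil => intro p i; rfl
  | cons a cs ih =>
      intro p i
      rw [List.foldl_cons, ih]
      exact pvRow_len_pres p (row + 1) _ (List.length_set ..) i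

theorem pvGrid_rowlen (board : List (List Int)) (cols : Nat) (rs : List Nat) :
    ∀ (p : List (List Int)) (i : Nat),
      ((rs.foldl (fun p row => (List.range cols).foldl (fun p col =>
          p.set (row + 1) ((p.getD (row + 1) []).set (col + 1) ((board.getD row []).getD col 0))) p)
        p).getD i []).length = (p.getD i []).length := by
  induction rs with
  | nil => intro p i; rfl
  | cons a rs ih =>
      intro p i
      rw [List.foldl_cons, ih, pvInnerFold_rowlen]

theorem pvGrid_getD (board : List (List Int)) (cols N : Nat) :
    ∀ (k : Nat), k + 1 ≤ N → ∀ (r' c' : Nat),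
      (((List.range k).foldl (fun p row => (List.range cols).foldl (fun p col =>
          p.set (row + 1) ((p.getD (row + 1) []).set (col + 1) ((board.getD row []).getD col 0))) p)
        (List.replicate N (List.replicate (cols + 2) 0))).getD r' []).getD c' 0 =
      if 1 ≤ r' ∧ r' ≤ k ∧ 1 ≤ c' ∧ c' ≤ cols
        then (board.getD (r' - 1) []).getD (c' - 1) 0 else 0 := by
  intro k
  induction k with
  | zero =>
      intro _ r' c'
      rw [List.range_zero, List.foldl_nil]
      rw [if_neg (by omega)]
      rcases lt_or_ge r' N with hr | hr
      · rw [List.getD_eq_getElem?_getD (l := List.replicate N (List.replicate (cols + 2) 0)),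
          List.getElem?_replicate, if_pos hr]
        simp only [Option.getD_some]
        rw [List.getD_eq_getElem?_getD, List.getElem?_replicate]
        split <;> rfl
      · rw [List.getD_eq_getElem?_getD (l := List.replicate N (List.replicate (cols + 2) 0)),
          List.getElem?_eq_none (by rw [List.length_replicate]; omega)]
        rfl
  | succ k ih =>
      intro hk r' c'
      rw [List.range_succ, List.foldl_append, List.foldl_cons, List.foldl_nil]
      have hlen : ((List.range k).foldl (fun p row => (List.range cols).foldl (fun p col =>
            p.set (row + 1) ((p.getD (row + 1) []).set (col + 1) ((board.getD row []).getD col 0))) p)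
          (List.replicate N (List.replicate (cols + 2) 0))).length = N := by
        rw [pvGrid_length, List.length_replicate]
      rw [pvInner_eq board k (List.range cols) _ (by omega)]
      rw [List.getD_eq_getElem?_getD (l := List.set _ _ _), List.getElem?_set, hlen]
      by_cases hr : k + 1 = r'
      · rw [if_pos hr, if_pos (by omega)]
        simp only [Option.getD_some]
        have hrowlen : (((List.range k).foldl (fun p row => (List.range cols).foldl (fun p col =>
              p.set (row + 1) ((p.getD (row + 1) []).set (col + 1) ((board.getD row []).getD col 0))) p)
            (List.replicate N (List.replicate (cols + 2) 0))).getD (k + 1) []).length = cols + 2 := by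
          rw [pvGrid_rowlen]
          rw [List.getD_eq_getElem?_getD, List.getElem?_replicate, if_pos (by omega)]
          simp
        rw [pvRowFold_getD _ cols _ (by omega) c']
        by_cases hc : 1 ≤ c' ∧ c' ≤ cols
        · rw [if_pos hc, if_pos (by omega)]
          congr 2
          omega
        · rw [if_neg hc, if_neg (by omega)]
          rw [ih (by omega) (k + 1) c', if_neg (by omega)]
      · rw [if_neg hr, ← List.getD_eq_getElem?_getD, ih (by omega) r' c']
        split_ifs <;> first | rfl | omega

theorem pvPadded_getD (board : List (List Int)) (rows cols : Nat) (r' c' : Nat) :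
    ((pvPadded board rows cols).getD r' []).getD c' 0 =
      if 1 ≤ r' ∧ r' ≤ rows ∧ 1 ≤ c' ∧ c' ≤ cols
        then (board.getD (r' - 1) []).getD (c' - 1) 0 else 0 := by
  unfold pvPadded
  exact pvGrid_getD board cols (rows + 2) rows (by omega) r' c'

theorem pvChk_eq_pass (board : List (List Int)) (rows cols : Nat) (ep : Int × Int) (nr nc : Int) :
    pvChkA (pvPadded board rows cols) ((rows : Int) + 2) ((cols : Int) + 2) ep nr nc
      = pvPassB board (rows : Int) (cols : Int) ep nr nc := by
  unfold pvChkA pvPassB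
  by_cases hb : 0 ≤ nr ∧ nr < (rows : Int) + 2 ∧ 0 ≤ nc ∧ nc < (cols : Int) + 2
  · have e1 : (decide (0 ≤ nr) && decide (nr < (rows : Int) + 2) && decide (0 ≤ nc) &&
        decide (nc < (cols : Int) + 2)) = true := by
      simp only [Bool.and_eq_true, decide_eq_true_eq]
      tauto
    rw [e1, Bool.true_and, if_neg (not_not_intro hb)]
    by_cases hep : (nr, nc) = ep
    · simp [hep]
    · rw [if_neg hep]
      have e2 : decide ((nr, nc) = ep) = false := by simp [hep]
      rw [e2, Bool.false_or]
      rw [pvPadded_getD]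
      by_cases hint : 1 ≤ nr ∧ nr ≤ (rows : Int) ∧ 1 ≤ nc ∧ nc ≤ (cols : Int)
      · rw [if_pos (by omega), if_pos hint]
        have i1 : nr.toNat - 1 = (nr - 1).toNat := by omega
        have i2 : nc.toNat - 1 = (nc - 1).toNat := by omega
        rw [i1, i2]
      · rw [if_neg (by omega), if_neg hint]
        rfl
  · have e1 : (decide (0 ≤ nr) && decide (nr < (rows : Int) + 2) && decide (0 ≤ nc) &&
        decide (nc < (cols : Int) + 2)) = false := by
      rw [Bool.eq_false_iff]
      intro hcon
      simp only [Bool.and_eq_true, decide_eq_true_eq] at hcon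
      exact hb ⟨hcon.1.1.1, hcon.1.1.2, hcon.1.2, hcon.2⟩
    rw [e1, Bool.false_and, if_pos hb]

theorem pvIterB_le {board : List (List Int)} {rows cols : Int} {ep sp : Int × Int}
    {n m : Nat} (h : n ≤ m) {x : Int × Int} (hx : x ∈ pvIterB board rows cols ep sp n) :
    x ∈ pvIterB board rows cols ep sp m := by
  induction m with
  | zero => rwa [Nat.le_zero.mp h] at hx
  | succ m ih =>
      rcases Nat.lt_or_ge n (m + 1) with h' | h'
      · exact pvIterB_mono (ih (by omega))
      · rwa [show n = m + 1 by omega] at hx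

theorem pvB_iff {board : List (List Int)} {rows cols : Int} {ep sp : Int × Int}
    (h0r : 0 ≤ rows) (h0c : 0 ≤ cols) (hne : sp ≠ ep) :
    (ep ∈ pvIterB board rows cols ep sp 3) ↔
      pvDerivEnd (pvPassB board rows cols ep) sp ep := by
  constructor
  · intro h
    rcases pvIterB_sound 3 (le_refl 3) ep h with h | ⟨j, t, hD, _⟩
    · exact absurd h.symm hne
    · exact ⟨j, t, hD⟩
  · rintro ⟨j, t, hD⟩
    obtain ⟨p, hp, _, rc, hrc, k, hk1, hr, hc, hall⟩ := pvIterB_complete h0r h0c hD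
    have ht2 : t.toNat + 1 ≤ 3 := by
      have := (pvDeriv_bounds hD).2
      omega
    have hfuel : k ≤ pvRayFuel rows cols := by
      have hb1 := hall 1 (le_refl 1) (by omega)
      have hbk := hall k (by omega) (le_refl k)
      exact pvRay_k_le (pvEnum_snd_mem p hp) h0r h0c (by omega) (by simpa using hb1) hbk
    have hmem : ep ∈ pvIterB board rows cols ep sp (t.toNat + 1) := by
      rw [pvIterB, pvMem_expand]
      refine Or.inr ⟨rc, hrc, p.2, pvEnum_snd_mem p hp, ?_⟩
      have := pvRay_complete hk1 hfuel hall
      rw [← hr, ← hc] at this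
      exact this
    exact pvIterB_le ht2 hmem

theorem pvSet_contains_iff {s : PySem.Set (Int × Int)} {x : Int × Int} :
    PySem.Set.contains s x = true ↔ x ∈ s := by
  show List.contains s x = true ↔ x ∈ s
  simp [List.contains_iff_mem]

theorem pvSp_ne_ep {start end_ : Int × Int} (h : start ≠ end_) :
    (start.1 + 1, start.2 + 1) ≠ (end_.1 + 1, end_.2 + 1) := by
  intro hc
  apply h
  simp only [Prod.mk.injEq] at hc
  exact Prod.ext (by omega) (by omega)

theorem pvMain_branch (board : List (List Int)) (start end_ : Int × Int)
    (hse : start ≠ end_) :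
    pvBFSloop (pvPadded board board.length (board.headD []).length)
        ((board.length : Int) + 2) (((board.headD []).length : Int) + 2)
        (end_.1 + 1, end_.2 + 1)
        (60 * ((board.length + 2) * ((board.headD []).length + 2)) + 8)
        (pvBFSinit (pvPadded board board.length (board.headD []).length)
          ((board.length : Int) + 2) (((board.headD []).length : Int) + 2)
          (end_.1 + 1, end_.2 + 1) (start.1 + 1, start.2 + 1)).1
        (pvBFSinit (pvPadded board board.length (board.headD []).length)
          ((board.length : Int) + 2) (((board.headD []).length : Int) + 2)
          (end_.1 + 1, end_.2 + 1) (start.1 + 1, start.2 + 1)).2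
      = PySem.Set.contains
          ((List.range 3).foldl
            (fun cells _ => pvExpandB board (board.length : Int) ((board.headD []).length : Int)
              (end_.1 + 1, end_.2 + 1) cells)
            (PySem.Set.ofList [(start.1 + 1, start.2 + 1)]))
          (end_.1 + 1, end_.2 + 1) := by
  set rows := board.length with hrows
  set cols := (board.headD []).length with hcols
  set sp : Int × Int := (start.1 + 1, start.2 + 1) with hsp
  set ep : Int × Int := (end_.1 + 1, end_.2 + 1) with hep
  set K : Nat := ((rows : Int) + 2).toNat * ((((cols : Int) + 2)).toNat * 4) with hKdef
  -- A side: the BFS loop decides pvDerivEnd for the padded-grid pass test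
  obtain ⟨hInv, hlen, hz⟩ := pvInit_inv (padded := pvPadded board rows cols)
    (prows := (rows : Int) + 2) (pcols := (cols : Int) + 2) (sp := sp) (ep := ep)
  have hphi : pvPhi K (pvBFSinit (pvPadded board rows cols) ((rows : Int) + 2)
      ((cols : Int) + 2) ep sp).2 ≤ 3 * K := pvPhi_le_of_zero hz
  have hKval : K = (rows + 2) * ((cols + 2) * 4) := by
    have h1 : ((rows : Int) + 2).toNat = rows + 2 := by omega
    have h2 : ((cols : Int) + 2).toNat = cols + 2 := by omega
    rw [hKdef, h1, h2]
  have hfuel : 5 * pvPhi K (pvBFSinit (pvPadded board rows cols) ((rows : Int) + 2)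
      ((cols : Int) + 2) ep sp).2 +
      (pvBFSinit (pvPadded board rows cols) ((rows : Int) + 2)
      ((cols : Int) + 2) ep sp).1.length
      < 60 * ((rows + 2) * (cols + 2)) + 8 := by
    have harith : 15 * ((rows + 2) * ((cols + 2) * 4)) = 60 * ((rows + 2) * (cols + 2)) := by ring
    have : 15 * K = 60 * ((rows + 2) * (cols + 2)) := by rw [hKval]; exact harith
    omega
  have hA := pvLoop_iff (padded := pvPadded board rows cols) (sp := sp) (ep := ep)
    (K := K) rfl (60 * ((rows + 2) * (cols + 2)) + 8) _ _ hInv hfuel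
  -- B side decides pvDerivEnd for the direct pass test
  have hiter : (List.range 3).foldl
      (fun cells _ => pvExpandB board (rows : Int) (cols : Int) ep cells)
      (PySem.Set.ofList [sp]) = pvIterB board (rows : Int) (cols : Int) ep sp 3 := rfl
  have hB : PySem.Set.contains ((List.range 3).foldl
      (fun cells _ => pvExpandB board (rows : Int) (cols : Int) ep cells)
      (PySem.Set.ofList [sp])) ep = true ↔
      pvDerivEnd (pvPassB board (rows : Int) (cols : Int) ep) sp ep := by
    rw [pvSet_contains_iff, hiter]
    exact pvB_iff (by omega) (by omega) (pvSp_ne_ep hse)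
  -- the two pass tests coincide
  have hpass : pvChkA (pvPadded board rows cols) ((rows : Int) + 2) ((cols : Int) + 2) ep
      = pvPassB board (rows : Int) (cols : Int) ep := by
    funext nr nc
    exact pvChk_eq_pass board rows cols ep nr nc
  rw [hpass] at hA
  rw [Bool.eq_iff_iff, hA, hB]

-- ===== VERDICT (by name: the statement is the Claim_ definition above) =====
theorem reference_can_connect_py_spec : Claim_equal_reference_can_connect_py := by
  intro board start end_ _ hPre
  unfold Spec_reference_can_connect_py
  by_cases hse : start = end_
  · unfold reference_can_connect_py reference_can_connect_py_alt
    rw [if_pos hse, if_pos hse]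
  · rcases hs : pvLookA board start.1 start.2 with _ | sv
    · rcases hPre with h | ⟨_, hsome, _⟩
      · exact absurd h hse
      · rw [show pvPreLook board start.1 start.2 = pvLookA board start.1 start.2 from rfl,
          hs] at hsome
        simp at hsome
    · rcases he : pvLookA board end_.1 end_.2 with _ | ev
      · rcases hPre with h | ⟨_, _, hsome, _⟩
        · exact absurd h hse
        · rw [show pvPreLook board end_.1 end_.2 = pvLookA board end_.1 end_.2 from rfl,
          he] at hsome
          simp at hsome
      · have hsB : pvLookB board start.1 start.2 = some sv := hs
        have heB : pvLookB board end_.1 end_.2 = some ev := he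
        unfold reference_can_connect_py reference_can_connect_py_alt
        rw [if_neg hse, if_neg hse]
        simp only [hs, he, hsB, heB]
        by_cases hg : (sv == 0 || sv != ev) = true
        · rw [if_pos hg, if_pos hg]
        · rw [if_neg hg, if_neg hg]
          exact pvMain_branch board start end_ hse
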